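-- pv_equiv track=rewrite | github.com/henry0816191/boost-data-collector | boost_library_usage_dashboard/analyzer_libraries.py | find_all_transitive_dependencies
-- ===== SOURCE A (Python) =====
-- from collections import defaultdict, deque
--
-- def find_all_transitive_dependencies(
--     main_lib_id: int,
--     version_id: int,
--     graph: dict[int, dict[int, list[int]]],
-- ) -> dict[int, int]:
--     """Return transitive dependencies/consumers with shortest depth."""
--     if main_lib_id not in graph or version_id not in graph[main_lib_id]:
--         return {}
--
--     all_deps: dict[int, int] = {}
--     queue: deque[tuple[int, int]] = deque(
--         (dep_id, 1)
--         for dep_id in graph[main_lib_id][version_id]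
--         if dep_id != main_lib_id
--     )
--     visited = {main_lib_id}
--     while queue:
--         lib_id, depth = queue.popleft()
--         if lib_id in visited:
--             continue
--         visited.add(lib_id)
--         all_deps[lib_id] = depth
--         for nxt in graph.get(lib_id, {}).get(version_id, []):
--             if nxt not in visited and nxt != main_lib_id:
--                 queue.append((nxt, depth + 1))
--     return all_deps
-- ===== SOURCE B (Python) =====
-- def find_all_transitive_dependencies(
--     main_lib_id: int,
--     version_id: int,
--     graph: dict[int, dict[int, list[int]]],
-- ) -> dict[int, int]:
--     """Iterative-deepening DFS: one depth-limited DFS per depth level, recording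
--     the nodes first reached at exactly that limit, until a deepening round
--     records nothing new."""
--     if main_lib_id not in graph or version_id not in graph[main_lib_id]:
--         return {}
--
--     roots = [d for d in graph[main_lib_id][version_id] if d != main_lib_id]
--     depth_of: dict[int, int] = {}
--     limit = 1
--     while True:
--         expanded: set[int] = set()
--
--         def dfs(node: int, d: int) -> None:
--             if d == limit:
--                 if node not in depth_of:
--                     depth_of[node] = limit
--             elif depth_of.get(node) == d and node not in expanded:
--                 expanded.add(node)
--                 for nxt in graph.get(node, {}).get(version_id, []):
--                     if nxt != main_lib_id:
--                         dfs(nxt, d + 1)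
--
--         before = len(depth_of)
--         for r in roots:
--             dfs(r, 1)
--         if len(depth_of) == before:
--             return depth_of
--         limit += 1
-- ===== Notes on version B (the rewrite author's own statement) =====
-- stated objective: alternative
-- what changed: Replaces the single-pass BFS over a deque of (node, depth) pairs with iterative deepening: a recursive depth-limited DFS is rerun with a growing depth limit, recording the nodes first reached at exactly the limit, until a deepening round records nothing new; there is no queue and no frontier, depths come from the limit counter.
import Mathlib
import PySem

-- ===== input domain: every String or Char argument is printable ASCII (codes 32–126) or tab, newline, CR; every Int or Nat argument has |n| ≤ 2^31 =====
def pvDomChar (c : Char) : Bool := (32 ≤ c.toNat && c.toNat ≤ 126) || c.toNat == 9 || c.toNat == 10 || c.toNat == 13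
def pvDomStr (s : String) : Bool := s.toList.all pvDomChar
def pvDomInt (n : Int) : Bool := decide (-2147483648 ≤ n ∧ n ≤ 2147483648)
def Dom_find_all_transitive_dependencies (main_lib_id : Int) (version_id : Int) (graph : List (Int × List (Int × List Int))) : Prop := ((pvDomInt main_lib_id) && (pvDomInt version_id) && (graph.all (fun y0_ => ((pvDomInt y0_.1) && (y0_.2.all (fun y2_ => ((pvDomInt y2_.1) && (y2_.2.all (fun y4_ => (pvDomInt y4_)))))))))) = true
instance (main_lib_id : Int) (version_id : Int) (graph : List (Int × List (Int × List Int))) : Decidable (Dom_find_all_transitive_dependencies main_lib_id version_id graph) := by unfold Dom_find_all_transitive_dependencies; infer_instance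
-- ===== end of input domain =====

-- B replaces A's queue-BFS by iterative deepening: a recursive depth-limited DFS per
-- depth level, recording nodes first reached at exactly the limit, until a round records
-- nothing new. A's loop uses fuel only to make its recursion structural; the fuel is a
-- termination measure proved sufficient in the lemmas below (it is never exhausted).

-- ===== PORT A =====
-- 'graph.get(lib_id, {}).get(version_id, [])' filtered by visited and main (A's enqueue line)
def pvNbrs (main_lib_id version_id : Int) (graph : List (Int × List (Int × List Int)))
    (v : PySem.Set Int) (x : Int) : List Int :=
  ((PySem.Dict.mk ((PySem.Dict.mk graph).getD x [])).getD version_id []).filter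
    (fun n => !(PySem.Set.contains v n) && !(n == main_lib_id))

-- fuel measures for A's loop (used only as the fuel argument; proved sufficient below)
def pvDepLen (version_id : Int) (inner : List (Int × List Int)) : Nat :=
  ((PySem.Dict.mk inner).getD version_id []).length

def pvUnvisSum (version_id : Int) (graph : List (Int × List (Int × List Int))) (v : PySem.Set Int) : Nat :=
  ((graph.filter (fun kv => !(PySem.Set.contains v kv.1))).map (fun kv => pvDepLen version_id kv.2)).sum

def phiA (version_id : Int) (graph : List (Int × List (Int × List Int)))
    (q : List (Int × Int)) (v : PySem.Set Int) : Nat :=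
  q.length + pvUnvisSum version_id graph v

-- A's loop: BFS over a queue of (node, depth) pairs, transliterating the Python while-loop.
def loopA (main_lib_id version_id : Int) (graph : List (Int × List (Int × List Int))) :
    Nat → List (Int × Int) → PySem.Set Int → PySem.Dict Int Int → PySem.Dict Int Int
  | 0, _, _, acc => acc
  | _ + 1, [], _, acc => acc
  | f + 1, (lib_id, depth) :: rest, v, acc =>
    if PySem.Set.contains v lib_id then
      loopA main_lib_id version_id graph f rest v acc
    else
      loopA main_lib_id version_id graph f
        (rest ++ (pvNbrs main_lib_id version_id graph (PySem.Set.add v lib_id) lib_id).map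
          (fun nxt => (nxt, depth + 1)))
        (PySem.Set.add v lib_id) (acc.insert lib_id depth)

def find_all_transitive_dependencies (main_lib_id : Int) (version_id : Int)
    (graph : List (Int × List (Int × List Int))) : List (Int × Int) :=
  let g := PySem.Dict.mk graph
  if !(g.contains main_lib_id) || !((PySem.Dict.mk (g.getD main_lib_id [])).contains version_id) then
    []
  else
    let deps := (PySem.Dict.mk (g.getD main_lib_id [])).getD version_id []
    let q0 := (deps.filter (fun dep_id => !(dep_id == main_lib_id))).map (fun dep_id => (dep_id, (1 : Int)))
    let v0 := PySem.Set.add PySem.Set.empty main_lib_id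
    (loopA main_lib_id version_id graph (phiA version_id graph q0 v0) q0 v0 PySem.Dict.empty).items

-- ===== PORT B =====
-- 'graph.get(node, {}).get(version_id, [])' with the 'nxt != main_lib_id' guard of B's dfs loop
def nbrsB (main_lib_id version_id : Int) (graph : List (Int × List (Int × List Int)))
    (x : Int) : List Int :=
  ((PySem.Dict.mk ((PySem.Dict.mk graph).getD x [])).getD version_id []).filter
    (fun n => !(n == main_lib_id))

-- B's recursive dfs; the Nat argument is limit - d (0 at the limit), so the recursion is structural.
def dfsB (main_lib_id version_id : Int) (graph : List (Int × List (Int × List Int))) (limit : Nat) :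
    Nat → Int → Int → (PySem.Dict Int Int × PySem.Set Int) → (PySem.Dict Int Int × PySem.Set Int)
  | 0, x, _, st =>
    if st.1.contains x then st else (st.1.insert x (limit : Int), st.2)
  | rem + 1, x, d, st =>
    if (st.1.get? x == some d) && !(PySem.Set.contains st.2 x) then
      (nbrsB main_lib_id version_id graph x).foldl
        (fun s n => dfsB main_lib_id version_id graph limit rem n (d + 1) s)
        (st.1, PySem.Set.add st.2 x)
    else st

-- outer-loop fuel for B (proved sufficient below: one deepening round per recorded node, plus one)
def pvTotalDeps (version_id : Int) (graph : List (Int × List (Int × List Int))) : Nat :=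
  (graph.map (fun kv => pvDepLen version_id kv.2)).sum

-- B's 'while True' deepening loop: one dfs pass from the roots per limit, stop when nothing new.
def iterB (main_lib_id version_id : Int) (graph : List (Int × List (Int × List Int)))
    (roots : List Int) : Nat → Nat → PySem.Dict Int Int → PySem.Dict Int Int
  | 0, _, rec => rec
  | f + 1, limit, rec =>
    let st := roots.foldl
      (fun s r => dfsB main_lib_id version_id graph limit (limit - 1) r 1 s)
      (rec, PySem.Set.empty)
    if st.1.size == rec.size then st.1
    else iterB main_lib_id version_id graph roots f (limit + 1) st.1

def find_all_transitive_dependencies_alt (main_lib_id : Int) (version_id : Int)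
    (graph : List (Int × List (Int × List Int))) : List (Int × Int) :=
  let g := PySem.Dict.mk graph
  if !(g.contains main_lib_id) || !((PySem.Dict.mk (g.getD main_lib_id [])).contains version_id) then
    []
  else
    let roots := ((PySem.Dict.mk (g.getD main_lib_id [])).getD version_id []).filter
      (fun d => !(d == main_lib_id))
    (iterB main_lib_id version_id graph roots
      (1 + roots.length + pvTotalDeps version_id graph) 1 PySem.Dict.empty).items

-- ===== PRECONDITION & SPEC =====
def Spec_find_all_transitive_dependencies (main_lib_id : Int) (version_id : Int) (graph : List (Int × List (Int × List Int))) (out : List (Int × Int)) : Prop := out = find_all_transitive_dependencies_alt main_lib_id version_id graph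
instance (main_lib_id : Int) (version_id : Int) (graph : List (Int × List (Int × List Int))) (out : List (Int × Int)) : Decidable (Spec_find_all_transitive_dependencies main_lib_id version_id graph out) := by unfold Spec_find_all_transitive_dependencies; infer_instance

-- ===== CLAIM (what is proved, stated in full; the proofs are below) =====
def Claim_equal_find_all_transitive_dependencies : Prop := ∀ (main_lib_id : Int) (version_id : Int) (graph : List (Int × List (Int × List Int))), Dom_find_all_transitive_dependencies main_lib_id version_id graph → Spec_find_all_transitive_dependencies main_lib_id version_id graph (find_all_transitive_dependencies main_lib_id version_id graph)

-- ===== LEMMAS AND PROOFS =====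
-- Proof plan: both ports are related to a level-synchronous ghost (procLevel / loopB below):
-- A's queue loop equals the ghost (level_bridge / loops_eq), and B's iterative-deepening
-- dfs equals the ghost (Phase I: dfs = level-ordered expansion; Phase II: expansion = ghost).

-- ---- the level-synchronous ghost ----
def procLevel (main_lib_id version_id : Int) (graph : List (Int × List (Int × List Int)))
    (fr : List Int) (depth : Int) (v : PySem.Set Int) (acc : PySem.Dict Int Int) (nx : List Int) :
    PySem.Set Int × PySem.Dict Int Int × List Int :=
  match fr with
  | [] => (v, acc, nx)
  | lib_id :: rest =>
    if PySem.Set.contains v lib_id then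
      procLevel main_lib_id version_id graph rest depth v acc nx
    else
      procLevel main_lib_id version_id graph rest depth (PySem.Set.add v lib_id)
        (acc.insert lib_id depth)
        (nx ++ pvNbrs main_lib_id version_id graph (PySem.Set.add v lib_id) lib_id)

def pvUnvisKeys (graph : List (Int × List (Int × List Int))) (v : PySem.Set Int) : Nat :=
  (graph.filter (fun kv => !(PySem.Set.contains v kv.1))).length

def phiB (graph : List (Int × List (Int × List Int))) (fr : List Int) (v : PySem.Set Int) : Nat :=
  2 * pvUnvisKeys graph v + (if fr = [] then 0 else 1)

def loopB (main_lib_id version_id : Int) (graph : List (Int × List (Int × List Int))) :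
    Nat → List Int → Int → PySem.Set Int → PySem.Dict Int Int → PySem.Dict Int Int
  | 0, _, _, _, acc => acc
  | _ + 1, [], _, _, acc => acc
  | f + 1, x :: t, depth, v, acc =>
    let r := procLevel main_lib_id version_id graph (x :: t) depth v acc []
    loopB main_lib_id version_id graph f r.2.2 (depth + 1) r.1 r.2.1

-- ---- basic Set facts ----
lemma pvContains_add (v : PySem.Set Int) (x y : Int) :
    PySem.Set.contains (PySem.Set.add v x) y = (PySem.Set.contains v y || (y == x)) := by
  by_cases h : y = x <;> by_cases h2 : y ∈ v <;>
    simp [h, h2, PySem.Set.mem_add]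

lemma pvContains_true_iff (v : PySem.Set Int) (x : Int) :
    PySem.Set.contains v x = true ↔ x ∈ v := by
  simp [PySem.Set.contains_eq_listContains]

-- ---- A-side fuel lemmas (A's queue loop never runs out of fuel) ----
lemma pvSum_mono (version_id : Int) (graph : List (Int × List (Int × List Int)))
    (v : PySem.Set Int) (x : Int) :
    pvUnvisSum version_id graph (PySem.Set.add v x) ≤ pvUnvisSum version_id graph v := by
  induction graph with
  | nil => simp [pvUnvisSum]
  | cons kv rest ih =>
    simp only [pvUnvisSum, List.filter_cons] at *
    by_cases hb : kv.1 ∈ v <;> by_cases hb2 : kv.1 = x <;>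
      simp_all [pvContains_add] <;> try omega

lemma pvGetD_mk_cons (k x : Int) (inner : List (Int × List Int)) (rest : List (Int × List (Int × List Int))) :
    (PySem.Dict.mk ((k, inner) :: rest)).getD x [] =
      (if k = x then inner else (PySem.Dict.mk rest).getD x []) := by
  rw [PySem.Dict.getD_eq_get?_getD, PySem.Dict.getD_eq_get?_getD, PySem.Dict.get?_mk_cons]
  by_cases h : k = x <;> simp [h]

lemma pvSum_drop (version_id : Int) (graph : List (Int × List (Int × List Int)))
    (v : PySem.Set Int) (x : Int) (hv : x ∉ v) :
    pvUnvisSum version_id graph (PySem.Set.add v x) +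
      pvDepLen version_id ((PySem.Dict.mk graph).getD x []) ≤ pvUnvisSum version_id graph v := by
  induction graph with
  | nil => simp [pvUnvisSum, pvDepLen, PySem.Dict.getD_eq_get?_getD, PySem.Dict.get?]
  | cons kv rest ih =>
    obtain ⟨k, inner2⟩ := kv
    rw [pvGetD_mk_cons]
    have hmono := pvSum_mono version_id rest v x
    simp only [pvUnvisSum, List.filter_cons] at *
    by_cases h2 : k = x
    · subst h2
      simp_all [pvContains_add]
      omega
    · by_cases hb : k ∈ v <;> simp_all [pvContains_add] <;> omega

lemma pvKeys_mono (graph : List (Int × List (Int × List Int))) (v : PySem.Set Int) (x : Int) :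
    pvUnvisKeys graph (PySem.Set.add v x) ≤ pvUnvisKeys graph v := by
  induction graph with
  | nil => simp [pvUnvisKeys]
  | cons kv rest ih =>
    simp only [pvUnvisKeys, List.filter_cons] at *
    by_cases hb : kv.1 ∈ v <;> by_cases hb2 : kv.1 = x <;>
      simp_all [pvContains_add] <;> try omega

lemma pvKeys_strict (graph : List (Int × List (Int × List Int))) (v : PySem.Set Int)
    (x : Int) (inner : List (Int × List Int)) (hm : (x, inner) ∈ graph)
    (hv : x ∉ v) :
    pvUnvisKeys graph (PySem.Set.add v x) < pvUnvisKeys graph v := by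
  induction graph with
  | nil => simp at hm
  | cons kv rest ih =>
    obtain ⟨k, inn⟩ := kv
    have hmono := pvKeys_mono rest v x
    simp only [pvUnvisKeys, List.filter_cons] at hmono ⊢
    rcases List.mem_cons.mp hm with heq | hm'
    · injection heq with h1 _
      subst h1
      simp_all [pvContains_add]
    · have hih := ih hm'
      simp only [pvUnvisKeys] at hih
      by_cases h2 : k = x
      · subst h2
        simp_all [pvContains_add]
      · by_cases hb : k ∈ v <;> simp_all [pvContains_add] <;> omega

lemma pvNbrs_key (main_lib_id version_id : Int) (graph : List (Int × List (Int × List Int)))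
    (v : PySem.Set Int) (x : Int) (h : pvNbrs main_lib_id version_id graph v x ≠ []) :
    ∃ inner, (x, inner) ∈ graph := by
  rcases hg : (PySem.Dict.mk graph).get? x with _ | inner
  · exfalso
    apply h
    have h0 : (PySem.Dict.mk graph).getD x [] = [] := by
      rw [PySem.Dict.getD_eq_get?_getD, hg]; rfl
    simp [pvNbrs, h0, PySem.Dict.getD_eq_get?_getD, PySem.Dict.get?]
  · exact ⟨inner, PySem.Dict.mem_items_of_get?_eq_some _ hg⟩

lemma pvNbrs_len (main_lib_id version_id : Int) (graph : List (Int × List (Int × List Int)))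
    (v : PySem.Set Int) (x : Int) :
    (pvNbrs main_lib_id version_id graph v x).length ≤
      pvDepLen version_id ((PySem.Dict.mk graph).getD x []) := by
  simp only [pvNbrs, pvDepLen]
  exact List.length_filter_le _ _

lemma procLevel_spec (main_lib_id version_id : Int) (graph : List (Int × List (Int × List Int))) :
    ∀ (fr : List Int) (depth : Int) (v : PySem.Set Int) (acc : PySem.Dict Int Int) (nx : List Int),
    pvUnvisKeys graph (procLevel main_lib_id version_id graph fr depth v acc nx).1 ≤ pvUnvisKeys graph v ∧
    ((procLevel main_lib_id version_id graph fr depth v acc nx).2.2 ≠ nx →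
      pvUnvisKeys graph (procLevel main_lib_id version_id graph fr depth v acc nx).1 < pvUnvisKeys graph v) := by
  intro fr
  induction fr with
  | nil => intro depth v acc nx; exact ⟨le_refl _, fun h => absurd rfl h⟩
  | cons x t ih =>
    intro depth v acc nx
    by_cases hc : x ∈ v
    · have hcb : PySem.Set.contains v x = true := (pvContains_true_iff v x).mpr hc
      simp only [procLevel, hcb, if_true]
      exact ih depth v acc nx
    · have hcb : PySem.Set.contains v x = false := by
        cases hb : PySem.Set.contains v x
        · rfl
        · exact absurd ((pvContains_true_iff v x).mp hb) hc
      have ihh := ih depth (PySem.Set.add v x) (acc.insert x depth)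
        (nx ++ pvNbrs main_lib_id version_id graph (PySem.Set.add v x) x)
      simp only [procLevel, hcb, Bool.false_eq_true, if_false]
      constructor
      · exact le_trans ihh.1 (pvKeys_mono graph v x)
      · intro hne
        by_cases hns : pvNbrs main_lib_id version_id graph (PySem.Set.add v x) x = []
        · by_cases hgrow : (procLevel main_lib_id version_id graph t depth (PySem.Set.add v x)
              (acc.insert x depth) (nx ++ pvNbrs main_lib_id version_id graph (PySem.Set.add v x) x)).2.2
              = nx ++ pvNbrs main_lib_id version_id graph (PySem.Set.add v x) x
          · exfalso
            apply hne
            rw [hgrow, hns, List.append_nil]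
          · exact lt_of_lt_of_le (ihh.2 hgrow) (pvKeys_mono graph v x)
        · obtain ⟨inner, hmem⟩ := pvNbrs_key main_lib_id version_id graph _ x hns
          exact lt_of_le_of_lt ihh.1 (pvKeys_strict graph v x inner hmem hc)

lemma loopA_nil (main_lib_id version_id : Int) (graph : List (Int × List (Int × List Int)))
    (f : Nat) (v : PySem.Set Int) (acc : PySem.Dict Int Int) :
    loopA main_lib_id version_id graph f [] v acc = acc := by
  cases f <;> rfl

lemma loopA_fuel (main_lib_id version_id : Int) (graph : List (Int × List (Int × List Int))) :
    ∀ (f g : Nat) (q : List (Int × Int)) (v : PySem.Set Int) (acc : PySem.Dict Int Int),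
    phiA version_id graph q v ≤ f → phiA version_id graph q v ≤ g →
    loopA main_lib_id version_id graph f q v acc = loopA main_lib_id version_id graph g q v acc := by
  intro f
  induction f with
  | zero =>
    intro g q v acc hf hg
    have hq : q = [] := by
      cases q with
      | nil => rfl
      | cons a t => simp [phiA] at hf
    subst hq
    rw [loopA_nil, loopA_nil]
  | succ m ih =>
    intro g q v acc hf hg
    cases q with
    | nil => rw [loopA_nil, loopA_nil]
    | cons p t =>
      obtain ⟨x, d⟩ := p
      have h1 : 1 ≤ phiA version_id graph ((x, d) :: t) v := by
        simp only [phiA, List.length_cons]; omega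
      cases g with
      | zero => omega
      | succ m' =>
        simp only [loopA]
        by_cases hc : PySem.Set.contains v x = true
        · simp only [hc, if_true]
          apply ih
          · simp only [phiA, List.length_cons] at hf ⊢; omega
          · simp only [phiA, List.length_cons] at hg ⊢; omega
        · have hcb : PySem.Set.contains v x = false := by
            cases hb : PySem.Set.contains v x
            · rfl
            · exact absurd hb hc
          have hv : x ∉ v := fun hmem => hc ((pvContains_true_iff v x).mpr hmem)
          have hdrop := pvSum_drop version_id graph v x hv
          have hlen := pvNbrs_len main_lib_id version_id graph (PySem.Set.add v x) x
          simp only [hcb, Bool.false_eq_true, if_false]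
          apply ih
          · simp only [phiA, List.length_append, List.length_map, List.length_cons] at hf ⊢; omega
          · simp only [phiA, List.length_append, List.length_map, List.length_cons] at hg ⊢; omega

lemma level_bridge (main_lib_id version_id : Int) (graph : List (Int × List (Int × List Int))) :
    ∀ (fr nx : List Int) (d : Int) (v : PySem.Set Int) (acc : PySem.Dict Int Int) (fA : Nat),
    phiA version_id graph (fr.map (fun x => (x, d)) ++ nx.map (fun x => (x, d + 1))) v ≤ fA →
    loopA main_lib_id version_id graph fA
        (fr.map (fun x => (x, d)) ++ nx.map (fun x => (x, d + 1))) v acc =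
      loopA main_lib_id version_id graph
        (phiA version_id graph
          ((procLevel main_lib_id version_id graph fr d v acc nx).2.2.map (fun x => (x, d + 1)))
          (procLevel main_lib_id version_id graph fr d v acc nx).1)
        ((procLevel main_lib_id version_id graph fr d v acc nx).2.2.map (fun x => (x, d + 1)))
        (procLevel main_lib_id version_id graph fr d v acc nx).1
        (procLevel main_lib_id version_id graph fr d v acc nx).2.1 := by
  intro fr
  induction fr with
  | nil =>
    intro nx d v acc fA hfA
    simp only [procLevel, List.map_nil, List.nil_append] at *
    exact loopA_fuel main_lib_id version_id graph fA _ _ v acc hfA (le_refl _)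
  | cons x t ih =>
    intro nx d v acc fA hfA
    have h1 : 1 ≤ phiA version_id graph
        ((x :: t).map (fun x => (x, d)) ++ nx.map (fun x => (x, d + 1))) v := by
      simp only [phiA, List.length_append, List.length_map, List.length_cons]; omega
    cases fA with
    | zero => omega
    | succ f =>
      by_cases hc : PySem.Set.contains v x = true
      · rw [List.map_cons, List.cons_append]
        simp only [loopA, hc, if_true, procLevel]
        apply ih
        simp only [phiA, List.length_append, List.length_map, List.length_cons] at hfA ⊢
        omega
      · have hcb : PySem.Set.contains v x = false := by
          cases hb : PySem.Set.contains v x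
          · rfl
          · exact absurd hb hc
        have hv : x ∉ v := fun hmem => hc ((pvContains_true_iff v x).mpr hmem)
        have hdrop := pvSum_drop version_id graph v x hv
        have hlen := pvNbrs_len main_lib_id version_id graph (PySem.Set.add v x) x
        rw [List.map_cons, List.cons_append]
        simp only [loopA, hcb, Bool.false_eq_true, if_false, procLevel]
        have harr : t.map (fun x => (x, d)) ++ nx.map (fun x => (x, d + 1)) ++
            (pvNbrs main_lib_id version_id graph (PySem.Set.add v x) x).map (fun n => (n, d + 1)) =
            t.map (fun x => (x, d)) ++
            (nx ++ pvNbrs main_lib_id version_id graph (PySem.Set.add v x) x).map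
              (fun x => (x, d + 1)) := by
          rw [List.map_append, List.append_assoc]
        rw [harr]
        apply ih
        simp only [phiA, List.length_append, List.length_map, List.length_cons] at hfA ⊢
        omega

lemma loops_eq (main_lib_id version_id : Int) (graph : List (Int × List (Int × List Int))) :
    ∀ (fB : Nat) (fr : List Int) (d : Int) (v : PySem.Set Int) (acc : PySem.Dict Int Int),
    phiB graph fr v ≤ fB →
    loopA main_lib_id version_id graph
        (phiA version_id graph (fr.map (fun x => (x, d))) v) (fr.map (fun x => (x, d))) v acc =
      loopB main_lib_id version_id graph fB fr d v acc := by
  intro fB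
  induction fB with
  | zero =>
    intro fr d v acc hb
    cases fr with
    | nil => rw [List.map_nil, loopA_nil]; rfl
    | cons x t => simp [phiB] at hb
  | succ m ih =>
    intro fr d v acc hb
    cases fr with
    | nil => rw [List.map_nil, loopA_nil]; rfl
    | cons x t =>
      simp only [loopB]
      have hmap : (x :: t).map (fun x => (x, d)) =
          (x :: t).map (fun x => (x, d)) ++ ([] : List Int).map (fun x => (x, d + 1)) := by simp
      rw [hmap, level_bridge main_lib_id version_id graph (x :: t) [] d v acc _ (by rw [← hmap])]
      apply ih
      have hspec := procLevel_spec main_lib_id version_id graph (x :: t) d v acc []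
      by_cases hnx : (procLevel main_lib_id version_id graph (x :: t) d v acc []).2.2 = []
      · have := hspec.1
        simp only [phiB, hnx, if_pos] at hb ⊢
        simp at hb ⊢
        omega
      · have hlt := hspec.2 hnx
        simp only [phiB] at hb ⊢
        rw [if_neg hnx]
        simp at hb
        omega

-- ===================================================================
-- ==== B-side: iterative deepening equals the level-synchronous ghost
-- ===================================================================

-- the levelsync chain of states (frontier, visited, acc) entering level n+1
def SC (main_lib_id version_id : Int) (graph : List (Int × List (Int × List Int)))
    (roots : List Int) : Nat → (List Int × PySem.Set Int × PySem.Dict Int Int)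
  | 0 => (roots, PySem.Set.add PySem.Set.empty main_lib_id, PySem.Dict.empty)
  | n + 1 =>
    let s := SC main_lib_id version_id graph roots n
    let r := procLevel main_lib_id version_id graph s.1 ((n : Int) + 1) s.2.1 s.2.2 []
    (r.2.2, r.1, r.2.1)

-- ---- Phase I ghosts: expansion of one level, level-ordered run ----
def expandL (main_lib_id version_id : Int) (graph : List (Int × List (Int × List Int)))
    (rec0 : PySem.Dict Int Int) (d : Int) : List Int → PySem.Set Int → (List Int × PySem.Set Int)
  | [], exp => ([], exp)
  | x :: F, exp =>
    if (rec0.get? x == some d) && !(PySem.Set.contains exp x) then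
      let r := expandL main_lib_id version_id graph rec0 d F (PySem.Set.add exp x)
      (nbrsB main_lib_id version_id graph x ++ r.1, r.2)
    else expandL main_lib_id version_id graph rec0 d F exp

def recordL (k : Int) : List Int → PySem.Dict Int Int → PySem.Dict Int Int
  | [], rec => rec
  | x :: F, rec => recordL k F (if rec.contains x then rec else rec.insert x k)

def levelsRun (main_lib_id version_id : Int) (graph : List (Int × List (Int × List Int)))
    (k : Nat) (rec0 : PySem.Dict Int Int) :
    Nat → Int → List Int → (PySem.Dict Int Int × PySem.Set Int) → (PySem.Dict Int Int × PySem.Set Int)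
  | 0, _, F, st => (recordL (k : Int) F st.1, st.2)
  | rem + 1, d, F, st =>
    let e := expandL main_lib_id version_id graph rec0 d F st.2
    levelsRun main_lib_id version_id graph k rec0 rem (d + 1) e.1 (st.1, e.2)

def dfsList (main_lib_id version_id : Int) (graph : List (Int × List (Int × List Int)))
    (k rem : Nat) (d : Int) (F : List Int) (st : PySem.Dict Int Int × PySem.Set Int) :
    PySem.Dict Int Int × PySem.Set Int :=
  F.foldl (fun s n => dfsB main_lib_id version_id graph k rem n d s) st

-- state relations
def ExtD (rec0 rec : PySem.Dict Int Int) (k : Nat) : Prop :=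
  ∀ x, rec.get? x = rec0.get? x ∨ (rec0.get? x = none ∧ rec.get? x = some (k : Int))

def AgreeFrom (rec0 : PySem.Dict Int Int) (d : Int) (e1 e2 : PySem.Set Int) : Prop :=
  ∀ m j, rec0.get? m = some j → d ≤ j →
    PySem.Set.contains e1 m = PySem.Set.contains e2 m

-- ---- small lemmas about these ----
lemma extD_refl (rec0 : PySem.Dict Int Int) (k : Nat) : ExtD rec0 rec0 k :=
  fun x => Or.inl rfl

lemma extD_trans {rec0 rec1 rec2 : PySem.Dict Int Int} {k : Nat}
    (h1 : ExtD rec0 rec1 k) (h2 : ExtD rec1 rec2 k) : ExtD rec0 rec2 k := by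
  intro x
  rcases h2 x with h | ⟨hn, hs⟩
  · rw [h]; exact h1 x
  · rcases h1 x with h' | ⟨hn', hs'⟩
    · rw [hn] at h'; exact Or.inr ⟨h'.symm, hs⟩
    · rw [hs'] at hn; cases hn

lemma extD_cond {rec0 rec : PySem.Dict Int Int} {k : Nat} (h : ExtD rec0 rec k)
    (d : Int) (hd : d ≠ (k : Int)) (x : Int) :
    (rec.get? x == some d) = (rec0.get? x == some d) := by
  rcases h x with h' | ⟨hn, hs⟩
  · rw [h']
  · rw [hn, hs]
    simp
    exact fun h' => hd h'.symm

lemma agreeFrom_refl (rec0 : PySem.Dict Int Int) (d : Int) (e : PySem.Set Int) :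
    AgreeFrom rec0 d e e := fun _ _ _ _ => rfl

-- ---- Phase I: expandL facts ----
lemma expandL_append (main_lib_id version_id : Int) (graph : List (Int × List (Int × List Int)))
    (rec0 : PySem.Dict Int Int) (d : Int) :
    ∀ (F1 F2 : List Int) (exp : PySem.Set Int),
    expandL main_lib_id version_id graph rec0 d (F1 ++ F2) exp =
      ((expandL main_lib_id version_id graph rec0 d F1 exp).1 ++
        (expandL main_lib_id version_id graph rec0 d F2
          (expandL main_lib_id version_id graph rec0 d F1 exp).2).1,
       (expandL main_lib_id version_id graph rec0 d F2
          (expandL main_lib_id version_id graph rec0 d F1 exp).2).2) := by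
  intro F1
  induction F1 with
  | nil => intro F2 exp; simp [expandL]
  | cons x F ih =>
    intro F2 exp
    by_cases hc : ((rec0.get? x == some d) && !(PySem.Set.contains exp x)) = true
    · simp only [List.cons_append, expandL, hc, if_true, ih, List.append_assoc]
    · simp only [List.cons_append, expandL, hc, Bool.false_eq_true, if_false, ih]

-- exp is unchanged on nodes whose recorded value is not d
lemma expandL_exp_other (main_lib_id version_id : Int) (graph : List (Int × List (Int × List Int)))
    (rec0 : PySem.Dict Int Int) (d : Int) (F : List Int) (exp : PySem.Set Int) (m : Int)
    (hm : rec0.get? m ≠ some d) :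
    PySem.Set.contains (expandL main_lib_id version_id graph rec0 d F exp).2 m =
      PySem.Set.contains exp m := by
  induction F generalizing exp with
  | nil => rfl
  | cons x F ih =>
    by_cases hc : ((rec0.get? x == some d) && !(PySem.Set.contains exp x)) = true
    · simp only [expandL, hc, if_true]
      rw [ih _]
      rw [pvContains_add]
      have hmx : m ≠ x := by
        intro he; subst he
        exact hm (by simpa using (Bool.and_eq_true_iff.mp hc).1)
      simp [hmx]
    · simp only [expandL, hc, if_false]
      exact ih _

lemma expandL_congr (main_lib_id version_id : Int) (graph : List (Int × List (Int × List Int)))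
    (rec0 : PySem.Dict Int Int) (d : Int) :
    ∀ (F : List Int) (e1 e2 : PySem.Set Int),
    (∀ m, rec0.get? m = some d →
      PySem.Set.contains e1 m = PySem.Set.contains e2 m) →
    (expandL main_lib_id version_id graph rec0 d F e1).1 =
      (expandL main_lib_id version_id graph rec0 d F e2).1 ∧
    (∀ m, rec0.get? m = some d →
      PySem.Set.contains (expandL main_lib_id version_id graph rec0 d F e1).2 m =
        PySem.Set.contains (expandL main_lib_id version_id graph rec0 d F e2).2 m) := by
  intro F
  induction F with
  | nil => intro e1 e2 h; exact ⟨rfl, fun m hm => h m hm⟩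
  | cons x F ih =>
    intro e1 e2 h
    by_cases hx : rec0.get? x = some d
    · have hcx : PySem.Set.contains e1 x = PySem.Set.contains e2 x := h x hx
      by_cases hc : ((rec0.get? x == some d) && !(PySem.Set.contains e1 x)) = true
      · have hc2 : ((rec0.get? x == some d) && !(PySem.Set.contains e2 x)) = true := by
          rw [← hcx]; exact hc
        simp only [expandL, hc, hc2, if_true]
        have ihh := ih (PySem.Set.add e1 x) (PySem.Set.add e2 x)
          (fun m hm => by rw [pvContains_add, pvContains_add, h m hm])
        exact ⟨by rw [ihh.1], ihh.2⟩
      · have hc2 : ((rec0.get? x == some d) && !(PySem.Set.contains e2 x)) = false := by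
          rw [Bool.eq_false_iff]; intro hcc; rw [← hcx] at hcc; exact hc hcc
        simp only [expandL, hc, hc2, Bool.false_eq_true, if_false]
        exact ih e1 e2 h
    · have hb : (rec0.get? x == some d) = false := by
        rw [beq_eq_false_iff_ne]; exact hx
      simp only [expandL, hb, Bool.false_and, Bool.false_eq_true, if_false]
      exact ih e1 e2 h

-- ---- Phase I: levelsRun facts ----
lemma levelsRun_nil (main_lib_id version_id : Int) (graph : List (Int × List (Int × List Int)))
    (k : Nat) (rec0 : PySem.Dict Int Int) :
    ∀ (rem : Nat) (d : Int) (st : PySem.Dict Int Int × PySem.Set Int),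
    levelsRun main_lib_id version_id graph k rec0 rem d [] st = st := by
  intro rem
  induction rem with
  | zero => intro d st; simp [levelsRun, recordL]
  | succ m ih => intro d st; simp only [levelsRun, expandL]; exact ih _ _

lemma recordL_ext (k : Int) :
    ∀ (F : List Int) (rec : PySem.Dict Int Int) (x : Int),
    (recordL k F rec).get? x = rec.get? x ∨
      (rec.get? x = none ∧ (recordL k F rec).get? x = some k) := by
  intro F
  induction F with
  | nil => intro rec x; exact Or.inl rfl
  | cons y F ih =>
    intro rec x
    by_cases hy : rec.contains y = true
    · simpa only [recordL, hy, if_true] using ih rec x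
    · simp only [recordL, hy, Bool.false_eq_true, if_false]
      rcases ih (rec.insert y k) x with h | ⟨hn, hs⟩
      · rw [h]
        by_cases hxy : x = y
        · subst hxy
          rw [PySem.Dict.get?_insert_self]
          refine Or.inr ⟨?_, rfl⟩
          rw [PySem.Dict.get?_eq_none_iff_contains]
          exact Bool.eq_false_iff.mpr hy
        · rw [PySem.Dict.get?_insert_of_ne _ _ hxy]
          exact Or.inl rfl
      · by_cases hxy : x = y
        · subst hxy
          rw [PySem.Dict.get?_insert_self] at hn
          cases hn
        · rw [PySem.Dict.get?_insert_of_ne _ _ hxy] at hn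
          exact Or.inr ⟨hn, hs⟩

lemma recordL_append (k : Int) :
    ∀ (F1 F2 : List Int) (rec : PySem.Dict Int Int),
    recordL k (F1 ++ F2) rec = recordL k F2 (recordL k F1 rec) := by
  intro F1
  induction F1 with
  | nil => intro F2 rec; rfl
  | cons x F ih =>
    intro F2 rec
    simp only [List.cons_append, recordL]
    exact ih F2 _

lemma levelsRun_extD (main_lib_id version_id : Int) (graph : List (Int × List (Int × List Int)))
    (k : Nat) (rec0 : PySem.Dict Int Int) :
    ∀ (rem : Nat) (d : Int) (F : List Int) (st : PySem.Dict Int Int × PySem.Set Int),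
    ExtD st.1 (levelsRun main_lib_id version_id graph k rec0 rem d F st).1 k := by
  intro rem
  induction rem with
  | zero =>
    intro d F st
    exact fun x => recordL_ext (k : Int) F st.1 x
  | succ m ih =>
    intro d F st
    simp only [levelsRun]
    exact ih (d + 1) _ (st.1, _)

lemma levelsRun_exp_other (main_lib_id version_id : Int) (graph : List (Int × List (Int × List Int)))
    (k : Nat) (rec0 : PySem.Dict Int Int) :
    ∀ (rem : Nat) (d : Int) (F : List Int) (st : PySem.Dict Int Int × PySem.Set Int) (m j : Int),
    rec0.get? m = some j → j < d →
    PySem.Set.contains (levelsRun main_lib_id version_id graph k rec0 rem d F st).2 m =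
      PySem.Set.contains st.2 m := by
  intro rem
  induction rem with
  | zero => intro d F st m j _ _; rfl
  | succ n ih =>
    intro d F st m j hm hj
    simp only [levelsRun]
    rw [ih (d + 1) _ (st.1, _) m j hm (by omega)]
    exact expandL_exp_other main_lib_id version_id graph rec0 d F st.2 m
      (fun he => by rw [he] at hm; exact absurd (Option.some.inj hm) (by omega))

lemma levelsRun_congr (main_lib_id version_id : Int) (graph : List (Int × List (Int × List Int)))
    (k : Nat) (rec0 : PySem.Dict Int Int) :
    ∀ (rem : Nat) (d : Int) (F : List Int) (rec : PySem.Dict Int Int) (e1 e2 : PySem.Set Int),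
    AgreeFrom rec0 d e1 e2 →
    (levelsRun main_lib_id version_id graph k rec0 rem d F (rec, e1)).1 =
      (levelsRun main_lib_id version_id graph k rec0 rem d F (rec, e2)).1 ∧
    AgreeFrom rec0 d (levelsRun main_lib_id version_id graph k rec0 rem d F (rec, e1)).2
      (levelsRun main_lib_id version_id graph k rec0 rem d F (rec, e2)).2 := by
  intro rem
  induction rem with
  | zero =>
    intro d F rec e1 e2 h
    exact ⟨rfl, h⟩
  | succ n ih =>
    intro d F rec e1 e2 h
    have hce := expandL_congr main_lib_id version_id graph rec0 d F e1 e2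
      (fun m hm => h m d hm le_rfl)
    have hnext : AgreeFrom rec0 (d + 1)
        (expandL main_lib_id version_id graph rec0 d F e1).2
        (expandL main_lib_id version_id graph rec0 d F e2).2 := by
      intro m j hm hj
      have hne : rec0.get? m ≠ some d := by
        rw [hm]; intro he; exact absurd (Option.some.inj he) (by omega)
      rw [expandL_exp_other main_lib_id version_id graph rec0 d F e1 m hne,
        expandL_exp_other main_lib_id version_id graph rec0 d F e2 m hne]
      exact h m j hm (by omega)
    have hIH := ih (d + 1) (expandL main_lib_id version_id graph rec0 d F e1).1 rec
      (expandL main_lib_id version_id graph rec0 d F e1).2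
      (expandL main_lib_id version_id graph rec0 d F e2).2 hnext
    simp only [levelsRun]
    constructor
    · rw [← hce.1]; exact hIH.1
    · intro m j hm hj
      rw [← hce.1]
      rcases eq_or_lt_of_le hj with heq | hlt
      · have hone1 := levelsRun_exp_other main_lib_id version_id graph k rec0 n (d + 1)
          (expandL main_lib_id version_id graph rec0 d F e1).1
          (rec, (expandL main_lib_id version_id graph rec0 d F e1).2) m j hm (by omega)
        have hone2 := levelsRun_exp_other main_lib_id version_id graph k rec0 n (d + 1)
          (expandL main_lib_id version_id graph rec0 d F e1).1
          (rec, (expandL main_lib_id version_id graph rec0 d F e2).2) m j hm (by omega)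
        rw [hone1, hone2]
        exact hce.2 m (by rw [hm, ← heq])
      · exact hIH.2 m j hm (by omega)

lemma levelsRun_append (main_lib_id version_id : Int) (graph : List (Int × List (Int × List Int)))
    (k : Nat) (rec0 : PySem.Dict Int Int) :
    ∀ (rem : Nat) (d : Int) (F1 F2 : List Int) (st : PySem.Dict Int Int × PySem.Set Int),
    (levelsRun main_lib_id version_id graph k rec0 rem d (F1 ++ F2) st).1 =
      (levelsRun main_lib_id version_id graph k rec0 rem d F2
        (levelsRun main_lib_id version_id graph k rec0 rem d F1 st)).1 ∧
    AgreeFrom rec0 d (levelsRun main_lib_id version_id graph k rec0 rem d (F1 ++ F2) st).2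
      (levelsRun main_lib_id version_id graph k rec0 rem d F2
        (levelsRun main_lib_id version_id graph k rec0 rem d F1 st)).2 := by
  intro rem
  induction rem with
  | zero =>
    intro d F1 F2 st
    simp only [levelsRun]
    exact ⟨recordL_append (k : Int) F1 F2 st.1, agreeFrom_refl rec0 d st.2⟩
  | succ n ih =>
    intro d F1 F2 st
    obtain ⟨rec, exp⟩ := st
    have happ := expandL_append main_lib_id version_id graph rec0 d F1 F2 exp
    set C1 := (expandL main_lib_id version_id graph rec0 d F1 exp).1 with hC1
    set e1 := (expandL main_lib_id version_id graph rec0 d F1 exp).2 with he1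
    set C2 := (expandL main_lib_id version_id graph rec0 d F2 e1).1 with hC2
    set e2 := (expandL main_lib_id version_id graph rec0 d F2 e1).2 with he2
    have hL : levelsRun main_lib_id version_id graph k rec0 (n + 1) d (F1 ++ F2) (rec, exp) =
        levelsRun main_lib_id version_id graph k rec0 n (d + 1) (C1 ++ C2) (rec, e2) := by
      simp only [levelsRun, happ]
    set rA := (levelsRun main_lib_id version_id graph k rec0 n (d + 1) C1 (rec, e1)).1 with hrA
    set eA := (levelsRun main_lib_id version_id graph k rec0 n (d + 1) C1 (rec, e1)).2 with heA
    have hF1 : levelsRun main_lib_id version_id graph k rec0 (n + 1) d F1 (rec, exp) = (rA, eA) := by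
      simp only [levelsRun, hrA, heA]
      rfl
    have heAd : ∀ m, rec0.get? m = some d →
        PySem.Set.contains eA m = PySem.Set.contains e1 m := by
      intro m hm
      rw [heA]
      exact levelsRun_exp_other main_lib_id version_id graph k rec0 n (d + 1) C1 (rec, e1) m d hm
        (by omega)
    have hcon := expandL_congr main_lib_id version_id graph rec0 d F2 eA e1 heAd
    set eA' := (expandL main_lib_id version_id graph rec0 d F2 eA).2 with heA'
    have hRHS : levelsRun main_lib_id version_id graph k rec0 (n + 1) d F2
        (levelsRun main_lib_id version_id graph k rec0 (n + 1) d F1 (rec, exp)) =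
        levelsRun main_lib_id version_id graph k rec0 n (d + 1) C2 (rA, eA') := by
      rw [hF1]
      simp only [levelsRun]
      rw [hcon.1]
    set rX := (levelsRun main_lib_id version_id graph k rec0 n (d + 1) C1 (rec, e2)).1 with hrX
    set eX := (levelsRun main_lib_id version_id graph k rec0 n (d + 1) C1 (rec, e2)).2 with heX
    have hXpair : levelsRun main_lib_id version_id graph k rec0 n (d + 1) C1 (rec, e2) = (rX, eX) := rfl
    have he2e1 : AgreeFrom rec0 (d + 1) e2 e1 := by
      intro m j hm hj
      have hne : rec0.get? m ≠ some d := by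
        rw [hm]; intro he; exact absurd (Option.some.inj he) (by omega)
      rw [he2, expandL_exp_other main_lib_id version_id graph rec0 d F2 e1 m hne]
    have hcong1 := levelsRun_congr main_lib_id version_id graph k rec0 n (d + 1) C1 rec e2 e1 he2e1
    have hrXrA : rX = rA := hcong1.1
    have heXeA : AgreeFrom rec0 (d + 1) eX eA := hcong1.2
    have heXeA' : AgreeFrom rec0 (d + 1) eX eA' := by
      intro m j hm hj
      have hne : rec0.get? m ≠ some d := by
        rw [hm]; intro he; exact absurd (Option.some.inj he) (by omega)
      rw [heA', expandL_exp_other main_lib_id version_id graph rec0 d F2 eA m hne]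
      exact heXeA m j hm hj
    have hcong2 := levelsRun_congr main_lib_id version_id graph k rec0 n (d + 1) C2 rA eX eA' heXeA'
    have hIH := ih (d + 1) C1 C2 (rec, e2)
    rw [hXpair] at hIH
    constructor
    · rw [hL, hRHS, hIH.1, hrXrA]
      exact hcong2.1
    · intro m j hm hj
      rw [hL, hRHS]
      rcases eq_or_lt_of_le hj with heq | hlt
      · have h1 := levelsRun_exp_other main_lib_id version_id graph k rec0 n (d + 1)
          (C1 ++ C2) (rec, e2) m j hm (by omega)
        have h2 := levelsRun_exp_other main_lib_id version_id graph k rec0 n (d + 1)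
          C2 (rA, eA') m j hm (by omega)
        rw [h1, h2]
        have hv := hcon.2 m (by rw [hm, ← heq])
        exact hv.symm
      · have hstep := hIH.2 m j hm (by omega)
        have h3 := hcong2.2 m j hm (by omega)
        rw [hrXrA] at hstep
        exact hstep.trans h3

-- ---- Phase I main: dfs = level-ordered run ----
lemma dfsList_zero (main_lib_id version_id : Int) (graph : List (Int × List (Int × List Int)))
    (k : Nat) :
    ∀ (d : Int) (F : List Int) (rec : PySem.Dict Int Int) (exp : PySem.Set Int),
    dfsList main_lib_id version_id graph k 0 d F (rec, exp) = (recordL (k : Int) F rec, exp) := by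
  intro d F
  induction F with
  | nil => intro rec exp; rfl
  | cons x F ih =>
    intro rec exp
    show dfsList main_lib_id version_id graph k 0 d F
      (dfsB main_lib_id version_id graph k 0 x d (rec, exp)) = _
    simp only [dfsB, recordL]
    by_cases hx : rec.contains x = true
    · simp only [hx, if_true]
      exact ih rec exp
    · simp only [hx, Bool.false_eq_true, if_false]
      exact ih _ exp

lemma dfs_levels (main_lib_id version_id : Int) (graph : List (Int × List (Int × List Int)))
    (k : Nat) (rec0 : PySem.Dict Int Int)
    (hval : ∀ x j, rec0.get? x = some j → 1 ≤ j) :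
    ∀ (rem : Nat) (d : Int) (F : List Int) (rec : PySem.Dict Int Int) (exp : PySem.Set Int),
    ExtD rec0 rec k → d + rem = (k : Int) → 1 ≤ d →
    (dfsList main_lib_id version_id graph k rem d F (rec, exp)).1 =
      (levelsRun main_lib_id version_id graph k rec0 rem d F (rec, exp)).1 ∧
    AgreeFrom rec0 1 (dfsList main_lib_id version_id graph k rem d F (rec, exp)).2
      (levelsRun main_lib_id version_id graph k rec0 rem d F (rec, exp)).2 := by
  intro rem
  induction rem with
  | zero =>
    intro d F rec exp _ _ _
    rw [dfsList_zero]
    exact ⟨rfl, agreeFrom_refl rec0 1 exp⟩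
  | succ n ihrem =>
    intro d F
    induction F with
    | nil =>
      intro rec exp hext hdk hd1
      rw [levelsRun_nil]
      exact ⟨rfl, agreeFrom_refl rec0 1 exp⟩
    | cons x F' ihF =>
      intro rec exp hext hdk hd1
      have hdne : d ≠ (k : Int) := by omega
      have hcond := extD_cond hext d hdne x
      by_cases hc : ((rec.get? x == some d) && !(PySem.Set.contains exp x)) = true
      · -- x is expanded
        have hc0 : ((rec0.get? x == some d) && !(PySem.Set.contains exp x)) = true := by
          rw [← hcond]; exact hc
        set nbx := nbrsB main_lib_id version_id graph x with hnbx
        have hBstep : dfsB main_lib_id version_id graph k (n + 1) x d (rec, exp) =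
            dfsList main_lib_id version_id graph k n (d + 1) nbx (rec, PySem.Set.add exp x) := by
          simp only [dfsB, hc, if_true]
          rfl
        have h1 := ihrem (d + 1) nbx rec (PySem.Set.add exp x) hext (by omega) (by omega)
        set L1 := levelsRun main_lib_id version_id graph k rec0 n (d + 1) nbx
          (rec, PySem.Set.add exp x) with hL1
        set D1 := dfsList main_lib_id version_id graph k n (d + 1) nbx
          (rec, PySem.Set.add exp x) with hD1
        have hExtL1 : ExtD rec0 L1.1 k :=
          extD_trans hext (levelsRun_extD main_lib_id version_id graph k rec0 n (d + 1) nbx _)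
        have hD1pair : D1 = (L1.1, D1.2) := by
          rw [← h1.1]
        -- inner IH at the state after x
        have h2 := ihF L1.1 D1.2 hExtL1 hdk hd1
        -- expandL on x :: F'
        have hexp_cons : expandL main_lib_id version_id graph rec0 d (x :: F') exp =
            (nbx ++ (expandL main_lib_id version_id graph rec0 d F' (PySem.Set.add exp x)).1,
             (expandL main_lib_id version_id graph rec0 d F' (PySem.Set.add exp x)).2) := by
          simp only [expandL, hc0, if_true]
          rfl
        set C0 := (expandL main_lib_id version_id graph rec0 d F' (PySem.Set.add exp x)).1 with hC0
        set e0 := (expandL main_lib_id version_id graph rec0 d F' (PySem.Set.add exp x)).2 with he0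
        have hRHSunf : levelsRun main_lib_id version_id graph k rec0 (n + 1) d (x :: F') (rec, exp) =
            levelsRun main_lib_id version_id graph k rec0 n (d + 1) (nbx ++ C0) (rec, e0) := by
          simp only [levelsRun, hexp_cons]
        have happ := levelsRun_append main_lib_id version_id graph k rec0 n (d + 1) nbx C0 (rec, e0)
        -- levelsRun (nb x) from (rec, e0) vs from (rec, add exp x)
        have hagree0 : AgreeFrom rec0 (d + 1) (PySem.Set.add exp x) e0 := by
          intro m j hm hj
          have hne : rec0.get? m ≠ some d := by
            rw [hm]; intro he; exact absurd (Option.some.inj he) (by omega)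
          rw [he0, expandL_exp_other main_lib_id version_id graph rec0 d F' (PySem.Set.add exp x) m hne]
        have hcong1 := levelsRun_congr main_lib_id version_id graph k rec0 n (d + 1) nbx rec
          (PySem.Set.add exp x) e0 hagree0
        set Y := levelsRun main_lib_id version_id graph k rec0 n (d + 1) nbx (rec, e0) with hY
        have hYrec : L1.1 = Y.1 := hcong1.1
        have hYexp : AgreeFrom rec0 (d + 1) L1.2 Y.2 := hcong1.2
        -- C' from D1.2 equals C0, with value-d agreement
        have hDd : ∀ m, rec0.get? m = some d →
            PySem.Set.contains D1.2 m = PySem.Set.contains (PySem.Set.add exp x) m := by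
          intro m hm
          have h1e := h1.2 m d hm (hval m d hm)
          have hLo := levelsRun_exp_other main_lib_id version_id graph k rec0 n (d + 1) nbx
            (rec, PySem.Set.add exp x) m d hm (by omega)
          rw [h1e]
          exact hLo
        have hconC := expandL_congr main_lib_id version_id graph rec0 d F' D1.2 (PySem.Set.add exp x) hDd
        set Cp := (expandL main_lib_id version_id graph rec0 d F' D1.2).1 with hCp
        set ep := (expandL main_lib_id version_id graph rec0 d F' D1.2).2 with hep
        have hCpC0 : Cp = C0 := hconC.1
        -- AgreeFrom (d+1) ep Y.2
        have hepY : AgreeFrom rec0 (d + 1) ep Y.2 := by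
          intro m j hm hj
          have hne : rec0.get? m ≠ some d := by
            rw [hm]; intro he; exact absurd (Option.some.inj he) (by omega)
          rw [hep, expandL_exp_other main_lib_id version_id graph rec0 d F' D1.2 m hne]
          have h1e := h1.2 m j hm (by omega)
          rw [h1e]
          exact hYexp m j hm hj
        have hcong2 := levelsRun_congr main_lib_id version_id graph k rec0 n (d + 1) C0 Y.1 ep Y.2 hepY
        -- unfold of levelsRun (n+1) d F' (L1.1, D1.2)
        have hmidunf : levelsRun main_lib_id version_id graph k rec0 (n + 1) d F' (L1.1, D1.2) =
            levelsRun main_lib_id version_id graph k rec0 n (d + 1) Cp (L1.1, ep) := by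
          simp only [levelsRun]
          rfl
        -- LHS chain
        have hLHSstep : dfsList main_lib_id version_id graph k (n + 1) d (x :: F') (rec, exp) =
            dfsList main_lib_id version_id graph k (n + 1) d F' (L1.1, D1.2) := by
          show dfsList main_lib_id version_id graph k (n + 1) d F'
            (dfsB main_lib_id version_id graph k (n + 1) x d (rec, exp)) = _
          rw [hBstep, hD1pair]
        constructor
        · -- rec components
          rw [hLHSstep, hRHSunf, h2.1, hmidunf, happ.1]
          rw [hCpC0, hYrec]
          exact hcong2.1
        · -- exp components, AgreeFrom 1
          intro m j hm hj
          rw [hLHSstep, hRHSunf]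
          have hLmid := h2.2 m j hm hj
          rw [hmidunf] at hLmid
          by_cases hjd : d + 1 ≤ j
          · -- high classes: chain of AgreeFrom (d+1)
            have hc2 := hcong2.2 m j hm hjd
            have happ2 := happ.2 m j hm hjd
            rw [hLmid]
            rw [hCpC0] at *
            calc PySem.Set.contains (levelsRun main_lib_id version_id graph k rec0 n (d + 1) C0 (L1.1, ep)).2 m
                = PySem.Set.contains (levelsRun main_lib_id version_id graph k rec0 n (d + 1) C0 (Y.1, ep)).2 m := by rw [hYrec]
              _ = PySem.Set.contains (levelsRun main_lib_id version_id graph k rec0 n (d + 1) C0 Y).2 m := hc2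
              _ = PySem.Set.contains (levelsRun main_lib_id version_id graph k rec0 n (d + 1) (nbx ++ C0) (rec, e0)).2 m := happ2.symm
          · -- low classes j ≤ d : everything preserves value-j content
            have hjle : j < d + 1 := by omega
            have hLlow := levelsRun_exp_other main_lib_id version_id graph k rec0 n (d + 1)
              Cp (L1.1, ep) m j hm hjle
            have hRlow := levelsRun_exp_other main_lib_id version_id graph k rec0 n (d + 1)
              (nbx ++ C0) (rec, e0) m j hm hjle
            rw [hLmid, hLlow, hRlow]
            show PySem.Set.contains ep m = PySem.Set.contains e0 m
            by_cases hjd2 : j = d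
            · subst hjd2
              have h1v := hconC.2 m hm
              exact h1v
            · have hne : rec0.get? m ≠ some d := by
                rw [hm]; intro he; exact absurd (Option.some.inj he) (by omega)
              rw [hep, expandL_exp_other main_lib_id version_id graph rec0 d F' D1.2 m hne]
              rw [he0, expandL_exp_other main_lib_id version_id graph rec0 d F'
                (PySem.Set.add exp x) m hne]
              have h1e := h1.2 m j hm hj
              rw [h1e]
              exact levelsRun_exp_other main_lib_id version_id graph k rec0 n (d + 1) nbx
                (rec, PySem.Set.add exp x) m j hm hjle
      · -- x is skipped
        have hc0 : ((rec0.get? x == some d) && !(PySem.Set.contains exp x)) = false := by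
          rw [← hcond, Bool.eq_false_iff]; exact hc
        have hstep : dfsList main_lib_id version_id graph k (n + 1) d (x :: F') (rec, exp) =
            dfsList main_lib_id version_id graph k (n + 1) d F' (rec, exp) := by
          show dfsList main_lib_id version_id graph k (n + 1) d F'
            (dfsB main_lib_id version_id graph k (n + 1) x d (rec, exp)) = _
          have : dfsB main_lib_id version_id graph k (n + 1) x d (rec, exp) = (rec, exp) := by
            simp only [dfsB]
            rw [← hcond] at hc0
            rw [hc0]
            simp
          rw [this]
        have hstepR : levelsRun main_lib_id version_id graph k rec0 (n + 1) d (x :: F') (rec, exp) =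
            levelsRun main_lib_id version_id graph k rec0 (n + 1) d F' (rec, exp) := by
          simp only [levelsRun, expandL, hc0, Bool.false_eq_true, if_false]
        rw [hstep, hstepR]
        exact ihF rec exp hext hdk hd1

-- ===================================================================
-- ==== Phase II: the level-ordered run equals the levelsync chain ====
-- ===================================================================

-- list with some dead elements dropped (kept elements in order)
inductive Del (p : Int → Prop) : List Int → List Int → Prop
  | nil : Del p [] []
  | keep {x : Int} {F F' : List Int} : Del p F F' → Del p (x :: F) (x :: F')
  | drop {x : Int} {F F' : List Int} : p x → Del p F F' → Del p (x :: F) F'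

lemma Del_refl (p : Int → Prop) : ∀ F : List Int, Del p F F := by
  intro F
  induction F with
  | nil => exact Del.nil
  | cons x F ih => exact Del.keep ih

lemma Del_filter (p : Int → Prop) (q : Int → Bool) :
    ∀ F : List Int, (∀ x ∈ F, q x = false → p x) → Del p F (F.filter q) := by
  intro F
  induction F with
  | nil => intro _; exact Del.nil
  | cons x F ih =>
    intro h
    by_cases hq : q x = true
    · rw [List.filter_cons_of_pos hq]
      exact Del.keep (ih (fun y hy => h y (List.mem_cons_of_mem x hy)))
    · rw [List.filter_cons_of_neg (by simpa using hq)]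
      exact Del.drop (h x (List.mem_cons_self) (by simpa using hq))
        (ih (fun y hy => h y (List.mem_cons_of_mem x hy)))

lemma Del_append (p : Int → Prop) :
    ∀ {F1 F1' F2 F2' : List Int}, Del p F1 F1' → Del p F2 F2' →
    Del p (F1 ++ F2) (F1' ++ F2') := by
  intro F1 F1' F2 F2' h1 h2
  induction h1 with
  | nil => exact h2
  | keep _ ih => exact Del.keep ih
  | drop hp _ ih => exact Del.drop hp ih

lemma Del_mem (p : Int → Prop) :
    ∀ {F F' : List Int}, Del p F F' → ∀ x ∈ F, x ∈ F' ∨ p x := by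
  intro F F' h
  induction h with
  | nil => intro x hx; cases hx
  | keep _ ih =>
    intro y hy
    rcases List.mem_cons.mp hy with h' | h'
    · exact Or.inl (h' ▸ List.mem_cons_self)
    · rcases ih y h' with h'' | h''
      · exact Or.inl (List.mem_cons_of_mem _ h'')
      · exact Or.inr h''
  | drop hp _ ih =>
    intro y hy
    rcases List.mem_cons.mp hy with h' | h'
    · exact Or.inr (h' ▸ hp)
    · exact ih y h'

-- pvNbrs is nbrsB filtered by the visited set
lemma pvNbrs_eq_filter (main_lib_id version_id : Int) (graph : List (Int × List (Int × List Int)))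
    (v : PySem.Set Int) (x : Int) :
    pvNbrs main_lib_id version_id graph v x =
      (nbrsB main_lib_id version_id graph x).filter (fun n => !(PySem.Set.contains v n)) := by
  simp only [pvNbrs, nbrsB, List.filter_filter, Bool.and_comm]

def pvAllDeps (version_id : Int) (graph : List (Int × List (Int × List Int))) : List Int :=
  graph.flatMap (fun kv => (PySem.Dict.mk kv.2).getD version_id [])

lemma pvGetD_cases (graph : List (Int × List (Int × List Int))) (x : Int) :
    (PySem.Dict.mk graph).getD x [] = [] ∨ ∃ kv ∈ graph, kv.2 = (PySem.Dict.mk graph).getD x [] := by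
  induction graph with
  | nil => exact Or.inl rfl
  | cons kv rest ih =>
    obtain ⟨kk, inner⟩ := kv
    rw [pvGetD_mk_cons]
    by_cases h : kk = x
    · simp only [h, if_true]
      exact Or.inr ⟨(x, inner), List.mem_cons_self, rfl⟩
    · simp only [h, if_false]
      rcases ih with h' | ⟨kv', hmem, heq⟩
      · exact Or.inl h'
      · exact Or.inr ⟨kv', List.mem_cons_of_mem _ hmem, heq⟩

lemma nbrsB_sub_allDeps (main_lib_id version_id : Int) (graph : List (Int × List (Int × List Int)))
    (x n : Int) (h : n ∈ nbrsB main_lib_id version_id graph x) :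
    n ∈ pvAllDeps version_id graph := by
  have h1 : n ∈ (PySem.Dict.mk ((PySem.Dict.mk graph).getD x [])).getD version_id [] :=
    List.mem_of_mem_filter h
  rcases pvGetD_cases graph x with h2 | ⟨kv, hmem, heq⟩
  · rw [h2] at h1
    simp [PySem.Dict.getD_eq_get?_getD, PySem.Dict.get?] at h1
  · exact List.mem_flatMap.mpr ⟨kv, hmem, by rw [heq]; exact h1⟩

lemma nbrsB_ne_main (main_lib_id version_id : Int) (graph : List (Int × List (Int × List Int)))
    (x n : Int) (h : n ∈ nbrsB main_lib_id version_id graph x) : n ≠ main_lib_id := by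
  have := List.of_mem_filter h
  simpa using this

lemma pvTotalDeps_eq (version_id : Int) (graph : List (Int × List (Int × List Int))) :
    (pvAllDeps version_id graph).length = pvTotalDeps version_id graph := by
  induction graph with
  | nil => rfl
  | cons kv rest ih =>
    simp only [pvAllDeps, List.flatMap_cons, List.length_append, pvTotalDeps, List.map_cons,
      List.sum_cons] at *
    rw [ih]
    rfl

-- ---- procLevel single-step facts ----
lemma procLevel_vmono (main_lib_id version_id : Int) (graph : List (Int × List (Int × List Int))) :
    ∀ (fr : List Int) (d : Int) (v : PySem.Set Int) (acc : PySem.Dict Int Int) (nx : List Int) (m : Int),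
    PySem.Set.contains v m = true →
    PySem.Set.contains (procLevel main_lib_id version_id graph fr d v acc nx).1 m = true := by
  intro fr
  induction fr with
  | nil => intro d v acc nx m h; exact h
  | cons x t ih =>
    intro d v acc nx m h
    by_cases hc : PySem.Set.contains v x = true
    · simp only [procLevel, hc, if_true]
      exact ih d v acc nx m h
    · simp only [procLevel, hc, if_false]
      exact ih d _ _ _ m (by rw [pvContains_add, h]; rfl)

lemma procLevel_vchar (main_lib_id version_id : Int) (graph : List (Int × List (Int × List Int))) :
    ∀ (fr : List Int) (d : Int) (v : PySem.Set Int) (acc : PySem.Dict Int Int) (nx : List Int),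
    (∀ m, PySem.Set.contains v m = (m == main_lib_id || acc.contains m)) →
    (∀ m, PySem.Set.contains (procLevel main_lib_id version_id graph fr d v acc nx).1 m =
      (m == main_lib_id || (procLevel main_lib_id version_id graph fr d v acc nx).2.1.contains m)) := by
  intro fr
  induction fr with
  | nil => intro d v acc nx h; exact h
  | cons x t ih =>
    intro d v acc nx h
    by_cases hc : PySem.Set.contains v x = true
    · simp only [procLevel, hc, if_true]
      exact ih d v acc nx h
    · simp only [procLevel, hc, if_false]
      apply ih
      intro m
      rw [pvContains_add, h m, PySem.Dict.contains_insert]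
      cases hma : (m == main_lib_id) <;> cases hmx : (m == x) <;> simp [hma, hmx]

lemma procLevel_get_pres (main_lib_id version_id : Int) (graph : List (Int × List (Int × List Int))) :
    ∀ (fr : List Int) (d : Int) (v : PySem.Set Int) (acc : PySem.Dict Int Int) (nx : List Int),
    (∀ m, PySem.Set.contains v m = (m == main_lib_id || acc.contains m)) →
    ∀ (m j : Int), acc.get? m = some j →
    (procLevel main_lib_id version_id graph fr d v acc nx).2.1.get? m = some j := by
  intro fr
  induction fr with
  | nil => intro d v acc nx _ m j h; exact h
  | cons x t ih =>
    intro d v acc nx hv m j h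
    by_cases hc : PySem.Set.contains v x = true
    · simp only [procLevel, hc, if_true]
      exact ih d v acc nx hv m j h
    · simp only [procLevel, hc, if_false]
      have hmx : m ≠ x := by
        intro he
        subst he
        have : acc.contains m = true := by
          rw [PySem.Dict.contains_eq_isSome_get?, h]; rfl
        rw [hv m, this] at hc
        simp at hc
      apply ih
      · intro m'
        rw [pvContains_add, hv m', PySem.Dict.contains_insert]
        cases hma : (m' == main_lib_id) <;> cases hmx' : (m' == x) <;> simp [hma, hmx']
      · rw [PySem.Dict.get?_insert_of_ne _ _ hmx]
        exact h

lemma procLevel_records (main_lib_id version_id : Int) (graph : List (Int × List (Int × List Int))) :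
    ∀ (fr : List Int) (d : Int) (v : PySem.Set Int) (acc : PySem.Dict Int Int) (nx : List Int),
    (∀ m, PySem.Set.contains v m = (m == main_lib_id || acc.contains m)) →
    ∀ x ∈ fr, PySem.Set.contains v x = false →
    (procLevel main_lib_id version_id graph fr d v acc nx).2.1.get? x = some d := by
  intro fr
  induction fr with
  | nil => intro d v acc nx _ x hx; cases hx
  | cons y t ih =>
    intro d v acc nx hv x hx hxv
    rcases List.mem_cons.mp hx with he | hmem
    · subst he
      simp only [procLevel, hxv, Bool.false_eq_true, if_false]
      apply procLevel_get_pres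
      · intro m'
        rw [pvContains_add, hv m', PySem.Dict.contains_insert]
        cases hma : (m' == main_lib_id) <;> cases hmx' : (m' == x) <;> simp [hma, hmx']
      · exact PySem.Dict.get?_insert_self _ _ _
    · by_cases hc : PySem.Set.contains v y = true
      · simp only [procLevel, hc, if_true]
        exact ih d v acc nx hv x hmem hxv
      · simp only [procLevel, hc, if_false]
        by_cases hxy : x = y
        · subst hxy
          simp only [procLevel] at *
          apply procLevel_get_pres
          · intro m'
            rw [pvContains_add, hv m', PySem.Dict.contains_insert]
            cases hma : (m' == main_lib_id) <;> cases hmx' : (m' == x) <;> simp [hma, hmx']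
          · exact PySem.Dict.get?_insert_self _ _ _
        · apply ih
          · intro m'
            rw [pvContains_add, hv m', PySem.Dict.contains_insert]
            cases hma : (m' == main_lib_id) <;> cases hmx' : (m' == y) <;> simp [hma, hmx']
          · exact hmem
          · rw [pvContains_add, hxv]
            simpa using hxy

lemma procLevel_values (main_lib_id version_id : Int) (graph : List (Int × List (Int × List Int))) :
    ∀ (fr : List Int) (d : Int) (v : PySem.Set Int) (acc : PySem.Dict Int Int) (nx : List Int),
    ∀ (m j : Int), (procLevel main_lib_id version_id graph fr d v acc nx).2.1.get? m = some j →
    acc.get? m = some j ∨ j = d := by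
  intro fr
  induction fr with
  | nil => intro d v acc nx m j h; exact Or.inl h
  | cons x t ih =>
    intro d v acc nx m j h
    by_cases hc : PySem.Set.contains v x = true
    · simp only [procLevel, hc, if_true] at h
      exact ih d v acc nx m j h
    · simp only [procLevel, hc, if_false] at h
      rcases ih _ _ _ _ m j h with h' | h'
      · by_cases hmx : m = x
        · subst hmx
          rw [PySem.Dict.get?_insert_self] at h'
          exact Or.inr (Option.some.inj h').symm
        · rw [PySem.Dict.get?_insert_of_ne _ _ hmx] at h'
          exact Or.inl h'
      · exact Or.inr h'

lemma procLevel_next_mem (main_lib_id version_id : Int) (graph : List (Int × List (Int × List Int))) :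
    ∀ (fr : List Int) (d : Int) (v : PySem.Set Int) (acc : PySem.Dict Int Int) (nx : List Int),
    ∀ n, n ∈ (procLevel main_lib_id version_id graph fr d v acc nx).2.2 →
    n ∈ nx ∨ ∃ x, n ∈ nbrsB main_lib_id version_id graph x := by
  intro fr
  induction fr with
  | nil => intro d v acc nx n h; exact Or.inl h
  | cons x t ih =>
    intro d v acc nx n h
    by_cases hc : PySem.Set.contains v x = true
    · simp only [procLevel, hc, if_true] at h
      exact ih d v acc nx n h
    · simp only [procLevel, hc, if_false] at h
      rcases ih _ _ _ _ n h with h' | h'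
      · rcases List.mem_append.mp h' with h'' | h''
        · exact Or.inl h''
        · refine Or.inr ⟨x, ?_⟩
          rw [pvNbrs_eq_filter] at h''
          exact List.mem_of_mem_filter h''
      · exact Or.inr h'

lemma procLevel_keys_nodup (main_lib_id version_id : Int) (graph : List (Int × List (Int × List Int))) :
    ∀ (fr : List Int) (d : Int) (v : PySem.Set Int) (acc : PySem.Dict Int Int) (nx : List Int),
    acc.keys.Nodup →
    (procLevel main_lib_id version_id graph fr d v acc nx).2.1.keys.Nodup := by
  intro fr
  induction fr with
  | nil => intro d v acc nx h; exact h
  | cons x t ih =>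
    intro d v acc nx h
    by_cases hc : PySem.Set.contains v x = true
    · simp only [procLevel, hc, if_true]
      exact ih d v acc nx h
    · simp only [procLevel, hc, if_false]
      exact ih d _ _ _ (PySem.Dict.nodup_keys_insert _ _ _ h)

lemma procLevel_keys_sub (main_lib_id version_id : Int) (graph : List (Int × List (Int × List Int))) :
    ∀ (fr : List Int) (d : Int) (v : PySem.Set Int) (acc : PySem.Dict Int Int) (nx : List Int),
    ∀ m, (procLevel main_lib_id version_id graph fr d v acc nx).2.1.contains m = true →
    acc.contains m = true ∨ m ∈ fr := by
  intro fr
  induction fr with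
  | nil => intro d v acc nx m h; exact Or.inl h
  | cons x t ih =>
    intro d v acc nx m h
    by_cases hc : PySem.Set.contains v x = true
    · simp only [procLevel, hc, if_true] at h
      rcases ih _ _ _ _ m h with h' | h'
      · exact Or.inl h'
      · exact Or.inr (List.mem_cons_of_mem _ h')
    · simp only [procLevel, hc, if_false] at h
      rcases ih _ _ _ _ m h with h' | h'
      · rw [PySem.Dict.contains_insert] at h'
        rcases Bool.or_eq_true_iff.mp h' with h'' | h''
        · exact Or.inr (by rw [show m = x from by simpa using h'']; exact List.mem_cons_self)
        · exact Or.inl h''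
      · exact Or.inr (List.mem_cons_of_mem _ h')

lemma procLevel_size (main_lib_id version_id : Int) (graph : List (Int × List (Int × List Int))) :
    ∀ (fr : List Int) (d : Int) (v : PySem.Set Int) (acc : PySem.Dict Int Int) (nx : List Int),
    (∀ m, PySem.Set.contains v m = (m == main_lib_id || acc.contains m)) →
    acc.size ≤ (procLevel main_lib_id version_id graph fr d v acc nx).2.1.size ∧
    ((procLevel main_lib_id version_id graph fr d v acc nx).2.1.size = acc.size →
      procLevel main_lib_id version_id graph fr d v acc nx = (v, acc, nx)) := by
  intro fr
  induction fr with
  | nil => intro d v acc nx _; exact ⟨le_refl _, fun _ => rfl⟩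
  | cons x t ih =>
    intro d v acc nx hv
    by_cases hc : PySem.Set.contains v x = true
    · simp only [procLevel, hc, if_true]
      exact ih d v acc nx hv
    · have hcb : PySem.Set.contains v x = false := by
        cases hb : PySem.Set.contains v x
        · rfl
        · exact absurd hb hc
      simp only [procLevel, hcb, Bool.false_eq_true, if_false]
      have hni : acc.contains x = false := by
        rw [hv x] at hcb
        cases h1 : (x == main_lib_id) <;> cases h2 : acc.contains x <;> simp [h1, h2] at hcb ⊢
      have hsz : (acc.insert x d).size = acc.size + 1 := by
        simp only [PySem.Dict.size, PySem.Dict.items_insert_of_not_contains _ _ hni,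
          List.length_append, List.length_cons, List.length_nil]
      have hvc : ∀ m, PySem.Set.contains (PySem.Set.add v x) m =
          (m == main_lib_id || (acc.insert x d).contains m) := by
        intro m'
        rw [pvContains_add, hv m', PySem.Dict.contains_insert]
        cases hma : (m' == main_lib_id) <;> cases hmx' : (m' == x) <;> simp [hma, hmx']
      obtain ⟨h1a, h1b⟩ := ih d (PySem.Set.add v x) (acc.insert x d)
        (nx ++ pvNbrs main_lib_id version_id graph (PySem.Set.add v x) x) hvc
      constructor
      · omega
      · intro he
        exfalso
        omega

-- ---- chain facts along the levelsync chain SC ----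
lemma chainCF (main_lib_id version_id : Int) (graph : List (Int × List (Int × List Int)))
    (roots : List Int) (hroots : ∀ x ∈ roots, x ≠ main_lib_id) :
    ∀ n : Nat,
    (∀ m, PySem.Set.contains (SC main_lib_id version_id graph roots n).2.1 m =
      (m == main_lib_id || ((SC main_lib_id version_id graph roots n).2.2).contains m)) ∧
    (∀ m j, ((SC main_lib_id version_id graph roots n).2.2).get? m = some j → 1 ≤ j ∧ j ≤ (n : Int)) ∧
    (∀ x ∈ (SC main_lib_id version_id graph roots n).1, x ≠ main_lib_id) ∧
    ((SC main_lib_id version_id graph roots n).2.2).keys.Nodup ∧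
    (∀ m, ((SC main_lib_id version_id graph roots n).2.2).contains m = true →
      m ∈ roots ∨ m ∈ pvAllDeps version_id graph) ∧
    (∀ x ∈ (SC main_lib_id version_id graph roots n).1,
      x ∈ roots ∨ x ∈ pvAllDeps version_id graph) := by
  intro n
  induction n with
  | zero =>
    refine ⟨?_, ?_, ?_, ?_, ?_, ?_⟩
    · intro m
      show PySem.Set.contains (PySem.Set.add PySem.Set.empty main_lib_id) m =
        (m == main_lib_id || (PySem.Dict.empty : PySem.Dict Int Int).contains m)
      rw [pvContains_add, PySem.Dict.contains_empty]
      cases h : (m == main_lib_id) <;> simp [PySem.Set.contains, PySem.Set.empty, h]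
    · intro m j h
      rw [show (SC main_lib_id version_id graph roots 0).2.2 = PySem.Dict.empty from rfl,
        PySem.Dict.get?_empty] at h
      cases h
    · exact hroots
    · exact PySem.Dict.nodup_keys_empty
    · intro m h
      rw [show (SC main_lib_id version_id graph roots 0).2.2 = PySem.Dict.empty from rfl,
        PySem.Dict.contains_empty] at h
      cases h
    · intro x hx
      exact Or.inl hx
  | succ n ih =>
    obtain ⟨f1, f2, f4, f7, f8, f9⟩ := ih
    have hstep : SC main_lib_id version_id graph roots (n + 1) =
        ((procLevel main_lib_id version_id graph (SC main_lib_id version_id graph roots n).1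
          ((n : Int) + 1) (SC main_lib_id version_id graph roots n).2.1
          (SC main_lib_id version_id graph roots n).2.2 []).2.2,
         (procLevel main_lib_id version_id graph (SC main_lib_id version_id graph roots n).1
          ((n : Int) + 1) (SC main_lib_id version_id graph roots n).2.1
          (SC main_lib_id version_id graph roots n).2.2 []).1,
         (procLevel main_lib_id version_id graph (SC main_lib_id version_id graph roots n).1
          ((n : Int) + 1) (SC main_lib_id version_id graph roots n).2.1
          (SC main_lib_id version_id graph roots n).2.2 []).2.1) := rfl
    rw [hstep]
    refine ⟨?_, ?_, ?_, ?_, ?_, ?_⟩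
    · exact procLevel_vchar main_lib_id version_id graph _ _ _ _ _ f1
    · intro m j h
      rcases procLevel_values main_lib_id version_id graph _ _ _ _ _ m j h with h' | h'
      · have := f2 m j h'
        constructor
        · exact this.1
        · push_cast
          omega
      · subst h'
        constructor
        · omega
        · push_cast
          omega
    · intro x hx
      rcases procLevel_next_mem main_lib_id version_id graph _ _ _ _ _ x hx with h' | ⟨y, h'⟩
      · cases h'
      · exact nbrsB_ne_main main_lib_id version_id graph y x h'
    · exact procLevel_keys_nodup main_lib_id version_id graph _ _ _ _ _ f7
    · intro m h
      rcases procLevel_keys_sub main_lib_id version_id graph _ _ _ _ _ m h with h' | h'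
      · exact f8 m h'
      · exact f9 m h'
    · intro x hx
      rcases procLevel_next_mem main_lib_id version_id graph _ _ _ _ _ x hx with h' | ⟨y, h'⟩
      · cases h'
      · exact Or.inr (nbrsB_sub_allDeps main_lib_id version_id graph y x h')

-- persistence of recorded values up the chain, and back down for small values
lemma chain_pers (main_lib_id version_id : Int) (graph : List (Int × List (Int × List Int)))
    (roots : List Int) (hroots : ∀ x ∈ roots, x ≠ main_lib_id) (n : Nat) (m j : Int)
    (h : ((SC main_lib_id version_id graph roots n).2.2).get? m = some j) :
    ((SC main_lib_id version_id graph roots (n + 1)).2.2).get? m = some j := by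
  exact procLevel_get_pres main_lib_id version_id graph _ _ _ _ _
    (chainCF main_lib_id version_id graph roots hroots n).1 m j h

lemma chain_pers_le (main_lib_id version_id : Int) (graph : List (Int × List (Int × List Int)))
    (roots : List Int) (hroots : ∀ x ∈ roots, x ≠ main_lib_id) (n p : Nat) (hnp : n ≤ p) (m j : Int)
    (h : ((SC main_lib_id version_id graph roots n).2.2).get? m = some j) :
    ((SC main_lib_id version_id graph roots p).2.2).get? m = some j := by
  induction p, hnp using Nat.le_induction with
  | base => exact h
  | succ p hnp ih => exact chain_pers main_lib_id version_id graph roots hroots p m j ih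

lemma chain_down (main_lib_id version_id : Int) (graph : List (Int × List (Int × List Int)))
    (roots : List Int) (n : Nat) (m j : Int)
    (h : ((SC main_lib_id version_id graph roots (n + 1)).2.2).get? m = some j)
    (hj : j ≤ (n : Int)) :
    ((SC main_lib_id version_id graph roots n).2.2).get? m = some j := by
  rcases procLevel_values main_lib_id version_id graph _ _ _ _ _ m j h with h' | h'
  · exact h'
  · exfalso
    omega

lemma chain_down_le (main_lib_id version_id : Int) (graph : List (Int × List (Int × List Int)))
    (roots : List Int) (n p : Nat) (hnp : n ≤ p) (m j : Int)
    (h : ((SC main_lib_id version_id graph roots p).2.2).get? m = some j)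
    (hj : j ≤ (n : Int)) :
    ((SC main_lib_id version_id graph roots n).2.2).get? m = some j := by
  induction p, hnp using Nat.le_induction with
  | base => exact h
  | succ p hnp ih =>
    apply ih
    apply chain_down main_lib_id version_id graph roots p m j h
    omega

lemma chain_rec (main_lib_id version_id : Int) (graph : List (Int × List (Int × List Int)))
    (roots : List Int) (hroots : ∀ x ∈ roots, x ≠ main_lib_id) (n : Nat) (x : Int)
    (hx : x ∈ (SC main_lib_id version_id graph roots n).1)
    (hv : PySem.Set.contains (SC main_lib_id version_id graph roots n).2.1 x = false) :
    ((SC main_lib_id version_id graph roots (n + 1)).2.2).get? x = some ((n : Int) + 1) := by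
  exact procLevel_records main_lib_id version_id graph _ _ _ _ _
    (chainCF main_lib_id version_id graph roots hroots n).1 x hx hv

-- ---- level K: recordL matches procLevel ----
lemma recordL_level (main_lib_id version_id : Int) (graph : List (Int × List (Int × List Int)))
    (rec0 : PySem.Dict Int Int) (dInt : Int) :
    ∀ {F fr : List Int},
    Del (fun x => ∃ j, rec0.get? x = some j ∧ j < dInt) F fr →
    ∀ (v : PySem.Set Int) (acc : PySem.Dict Int Int) (nx : List Int),
    (∀ x ∈ F, x ≠ main_lib_id) →
    (∀ m, PySem.Set.contains v m = (m == main_lib_id || acc.contains m)) →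
    (∀ m, rec0.contains m = true → acc.contains m = true) →
    recordL dInt F acc = (procLevel main_lib_id version_id graph fr dInt v acc nx).2.1 := by
  intro F fr hDel
  induction hDel with
  | nil => intro v acc nx _ _ _; rfl
  | @keep x Ft frt hrel ih =>
    intro v acc nx hF hv hmono
    by_cases hax : acc.contains x = true
    · have hvx : PySem.Set.contains v x = true := by
        rw [hv x, hax]
        simp
      simp only [recordL, hax, if_true, procLevel, hvx]
      exact ih v acc nx (fun y hy => hF y (List.mem_cons_of_mem _ hy)) hv hmono
    · have haxf : acc.contains x = false := by
        cases hb : acc.contains x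
        · rfl
        · exact absurd hb hax
      have hxa : x ≠ main_lib_id := hF x List.mem_cons_self
      have hvx : PySem.Set.contains v x = false := by
        rw [hv x, haxf]
        simpa using hxa
      simp only [recordL, haxf, Bool.false_eq_true, if_false, procLevel, hvx]
      apply ih
      · exact fun y hy => hF y (List.mem_cons_of_mem _ hy)
      · intro m'
        rw [pvContains_add, hv m', PySem.Dict.contains_insert]
        cases hma : (m' == main_lib_id) <;> cases hmx' : (m' == x) <;> simp [hma, hmx']
      · intro m hm
        rw [PySem.Dict.contains_insert, hmono m hm]
        simp
  | @drop x Ft frt hp hrel ih =>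
    intro v acc nx hF hv hmono
    obtain ⟨j, hj, _⟩ := hp
    have hc : rec0.contains x = true := by
      rw [PySem.Dict.contains_eq_isSome_get?, hj]
      rfl
    have hax : acc.contains x = true := hmono x hc
    simp only [recordL, hax, if_true]
    exact ih v acc nx (fun y hy => hF y (List.mem_cons_of_mem _ hy)) hv hmono

-- ---- levels below K: expandL matches procLevel ----
lemma expandL_level (main_lib_id version_id : Int) (graph : List (Int × List (Int × List Int)))
    (rec0 : PySem.Dict Int Int) (d : Int) :
    ∀ {F fr : List Int},
    Del (fun x => ∃ j, rec0.get? x = some j ∧ j < d) F fr →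
    ∀ (v : PySem.Set Int) (acc : PySem.Dict Int Int) (nx : List Int) (exp : PySem.Set Int),
    (∀ m, PySem.Set.contains exp m = acc.contains m) →
    (∀ m, PySem.Set.contains v m = (m == main_lib_id || acc.contains m)) →
    (∀ x ∈ F, x ≠ main_lib_id ∧ (rec0.get? x = some d ∨ acc.contains x = true)) →
    (∀ m j, acc.get? m = some j → rec0.get? m = some j ∧ j ≤ d) →
    ∃ w, (procLevel main_lib_id version_id graph fr d v acc nx).2.2 = nx ++ w ∧
      Del (fun x => ∃ j, rec0.get? x = some j ∧ j < d + 1)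
        (expandL main_lib_id version_id graph rec0 d F exp).1 w ∧
      (∀ m, PySem.Set.contains (expandL main_lib_id version_id graph rec0 d F exp).2 m =
        (procLevel main_lib_id version_id graph fr d v acc nx).2.1.contains m) ∧
      (∀ x' ∈ (expandL main_lib_id version_id graph rec0 d F exp).1, x' ≠ main_lib_id ∧
        (x' ∈ w ∨ PySem.Set.contains (procLevel main_lib_id version_id graph fr d v acc nx).1 x' = true)) := by
  intro F fr hDel
  induction hDel with
  | nil =>
    intro v acc nx exp hP1 hP2 hHF hP4
    refine ⟨[], by rw [List.append_nil]; rfl, Del.nil, ?_, ?_⟩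
    · intro m
      exact hP1 m
    · intro x' hx'
      cases hx'
  | @keep x Ft frt hrel ih =>
    intro v acc nx exp hP1 hP2 hHF hP4
    by_cases halive : rec0.get? x = some d
    · by_cases hexp : PySem.Set.contains exp x = true
      · -- already expanded / visited: both sides skip
        have hax : acc.contains x = true := by rw [← hP1 x]; exact hexp
        have hvx : PySem.Set.contains v x = true := by
          rw [hP2 x, hax]
          simp
        have hcE : ((rec0.get? x == some d) && !(PySem.Set.contains exp x)) = false := by
          rw [hexp]
          simp
        simp only [expandL, hcE, Bool.false_eq_true, if_false, procLevel, hvx, if_true]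
        exact ih v acc nx exp hP1 hP2 (fun y hy => hHF y (List.mem_cons_of_mem _ hy)) hP4
      · -- selected by both
        have hexpf : PySem.Set.contains exp x = false := by
          cases hb : PySem.Set.contains exp x
          · rfl
          · exact absurd hb hexp
        have hax : acc.contains x = false := by rw [← hP1 x]; exact hexpf
        have hxa : x ≠ main_lib_id := (hHF x List.mem_cons_self).1
        have hvx : PySem.Set.contains v x = false := by
          rw [hP2 x, hax]
          simpa using hxa
        have hcE : ((rec0.get? x == some d) && !(PySem.Set.contains exp x)) = true := by
          rw [halive, hexpf]
          simp
        have hvc' : ∀ m, PySem.Set.contains (PySem.Set.add v x) m =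
            (m == main_lib_id || (acc.insert x d).contains m) := by
          intro m'
          rw [pvContains_add, hP2 m', PySem.Dict.contains_insert]
          cases hma : (m' == main_lib_id) <;> cases hmx' : (m' == x) <;> simp [hma, hmx']
        have hP1' : ∀ m, PySem.Set.contains (PySem.Set.add exp x) m =
            (acc.insert x d).contains m := by
          intro m'
          rw [pvContains_add, hP1 m', PySem.Dict.contains_insert]
          cases hmx' : (m' == x) <;> simp [hmx']
        have hHF' : ∀ y ∈ Ft, y ≠ main_lib_id ∧
            (rec0.get? y = some d ∨ (acc.insert x d).contains y = true) := by
          intro y hy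
          obtain ⟨hy1, hy2⟩ := hHF y (List.mem_cons_of_mem _ hy)
          refine ⟨hy1, ?_⟩
          rcases hy2 with h' | h'
          · exact Or.inl h'
          · refine Or.inr ?_
            rw [PySem.Dict.contains_insert, h']
            simp
        have hP4' : ∀ m j, (acc.insert x d).get? m = some j →
            rec0.get? m = some j ∧ j ≤ d := by
          intro m j hm
          by_cases hmx : m = x
          · subst hmx
            rw [PySem.Dict.get?_insert_self] at hm
            have := Option.some.inj hm
            subst this
            exact ⟨halive, le_refl d⟩
          · rw [PySem.Dict.get?_insert_of_ne _ _ hmx] at hm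
            exact hP4 m j hm
        obtain ⟨w', hsplit', hDel', hP1'', hc5'⟩ := ih (PySem.Set.add v x) (acc.insert x d)
          (nx ++ pvNbrs main_lib_id version_id graph (PySem.Set.add v x) x)
          (PySem.Set.add exp x) hP1' hvc' hHF' hP4'
        refine ⟨pvNbrs main_lib_id version_id graph (PySem.Set.add v x) x ++ w', ?_, ?_, ?_, ?_⟩
        · simp only [procLevel, hvx, Bool.false_eq_true, if_false]
          rw [hsplit', List.append_assoc]
        · simp only [expandL, hcE, if_true]
          apply Del_append
          · rw [pvNbrs_eq_filter]
            apply Del_filter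
            intro n' hn' hq
            have hvn : PySem.Set.contains (PySem.Set.add v x) n' = true := by
              cases hb : PySem.Set.contains (PySem.Set.add v x) n'
              · rw [hb] at hq
                simp at hq
              · rfl
            have hna : n' ≠ main_lib_id := nbrsB_ne_main main_lib_id version_id graph x n' hn'
            rw [hvc' n'] at hvn
            have hacn : (acc.insert x d).contains n' = true := by
              cases hb : (n' == main_lib_id)
              · rw [hb] at hvn
                simpa using hvn
              · exact absurd (by simpa using hb) hna
            have : ∃ j, (acc.insert x d).get? n' = some j := by
              rw [PySem.Dict.contains_eq_isSome_get?] at hacn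
              cases hg : (acc.insert x d).get? n'
              · rw [hg] at hacn
                cases hacn
              · exact ⟨_, rfl⟩
            obtain ⟨j, hj⟩ := this
            obtain ⟨hr0, hle⟩ := hP4' n' j hj
            exact ⟨j, hr0, by omega⟩
          · exact hDel'
        · intro m
          simp only [expandL, hcE, if_true, procLevel, hvx, Bool.false_eq_true, if_false]
          exact hP1'' m
        · intro x' hx'
          simp only [expandL, hcE, if_true] at hx'
          simp only [procLevel, hvx, Bool.false_eq_true, if_false]
          rcases List.mem_append.mp hx' with hmem | hmem
          · refine ⟨nbrsB_ne_main main_lib_id version_id graph x x' hmem, ?_⟩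
            by_cases hvv : PySem.Set.contains (PySem.Set.add v x) x' = true
            · exact Or.inr (procLevel_vmono main_lib_id version_id graph _ _ _ _ _ x' hvv)
            · refine Or.inl (List.mem_append.mpr (Or.inl ?_))
              rw [pvNbrs_eq_filter]
              apply List.mem_filter.mpr
              refine ⟨hmem, ?_⟩
              cases hb : PySem.Set.contains (PySem.Set.add v x) x'
              · rfl
              · exact absurd hb hvv
          · obtain ⟨h1, h2⟩ := hc5' x' hmem
            refine ⟨h1, ?_⟩
            rcases h2 with h' | h'
            · exact Or.inl (List.mem_append.mpr (Or.inr h'))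
            · exact Or.inr h'
    · -- not at this depth: skipped by expandL; visited, so skipped by procLevel too
      have hcE : ((rec0.get? x == some d) && !(PySem.Set.contains exp x)) = false := by
        have : (rec0.get? x == some d) = false := by
          rw [beq_eq_false_iff_ne]
          exact halive
        rw [this]
        simp
      have hax : acc.contains x = true := by
        rcases (hHF x List.mem_cons_self).2 with h' | h'
        · exact absurd h' halive
        · exact h'
      have hvx : PySem.Set.contains v x = true := by
        rw [hP2 x, hax]
        simp
      simp only [expandL, hcE, Bool.false_eq_true, if_false, procLevel, hvx, if_true]
      exact ih v acc nx exp hP1 hP2 (fun y hy => hHF y (List.mem_cons_of_mem _ hy)) hP4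
  | @drop x Ft frt hp hrel ih =>
    intro v acc nx exp hP1 hP2 hHF hP4
    obtain ⟨j, hj, hjd⟩ := hp
    have hcE : ((rec0.get? x == some d) && !(PySem.Set.contains exp x)) = false := by
      have : (rec0.get? x == some d) = false := by
        rw [beq_eq_false_iff_ne]
        rw [hj]
        intro he
        have := Option.some.inj he
        omega
      rw [this]
      simp
    simp only [expandL, hcE, Bool.false_eq_true, if_false]
    exact ih v acc nx exp hP1 hP2 (fun y hy => hHF y (List.mem_cons_of_mem _ hy)) hP4

-- ---- II assembly: the level-ordered run from the roots computes the next chain acc ----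
lemma levels_to_chain (main_lib_id version_id : Int) (graph : List (Int × List (Int × List Int)))
    (roots : List Int) (hroots : ∀ x ∈ roots, x ≠ main_lib_id) (K : Nat) (hK : 1 ≤ K) :
    ∀ (rem n : Nat), rem + n + 1 = K →
    ∀ (F : List Int) (exp : PySem.Set Int),
    Del (fun x => ∃ j, ((SC main_lib_id version_id graph roots (K - 1)).2.2).get? x = some j ∧
      j < ((n : Int) + 1)) F (SC main_lib_id version_id graph roots n).1 →
    (∀ m, PySem.Set.contains exp m = ((SC main_lib_id version_id graph roots n).2.2).contains m) →
    (∀ x ∈ F, x ≠ main_lib_id) →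
    (levelsRun main_lib_id version_id graph K ((SC main_lib_id version_id graph roots (K - 1)).2.2)
      rem ((n : Int) + 1) F ((SC main_lib_id version_id graph roots (K - 1)).2.2, exp)).1 =
      (SC main_lib_id version_id graph roots K).2.2 := by
  intro rem
  induction rem with
  | zero =>
    intro n hn F exp hDel hP1 hFa
    have hnK : n = K - 1 := by omega
    subst hnK
    have hcast : ((K - 1 : Nat) : Int) + 1 = (K : Int) := by
      push_cast [Nat.cast_sub hK]
      ring
    have hKstep : (SC main_lib_id version_id graph roots K).2.2 =
        (procLevel main_lib_id version_id graph (SC main_lib_id version_id graph roots (K - 1)).1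
          (((K - 1 : Nat) : Int) + 1) (SC main_lib_id version_id graph roots (K - 1)).2.1
          (SC main_lib_id version_id graph roots (K - 1)).2.2 []).2.1 := by
      conv_lhs => rw [show K = (K - 1) + 1 from by omega]
      rfl
    show (recordL (K : Int) F
      (SC main_lib_id version_id graph roots (K - 1)).2.2, exp).1 = _
    rw [hKstep]
    rw [← hcast]
    apply recordL_level main_lib_id version_id graph _ (((K - 1 : Nat) : Int) + 1) hDel
    · exact hFa
    · exact (chainCF main_lib_id version_id graph roots hroots (K - 1)).1
    · intro m hm
      exact hm
  | succ rem ih =>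
    intro n hn F exp hDel hP1 hFa
    have hcf := chainCF main_lib_id version_id graph roots hroots n
    obtain ⟨f1, f2, f4, f7, f8, f9⟩ := hcf
    have hn1K : n + 1 ≤ K - 1 := by omega
    have hnK : n ≤ K - 1 := by omega
    -- HF and P4 hypotheses for expandL_level
    have hHF : ∀ x ∈ F, x ≠ main_lib_id ∧
        (((SC main_lib_id version_id graph roots (K - 1)).2.2).get? x = some ((n : Int) + 1) ∨
          ((SC main_lib_id version_id graph roots n).2.2).contains x = true) := by
      intro x hx
      refine ⟨hFa x hx, ?_⟩
      rcases Del_mem _ hDel x hx with hmem | ⟨j, hj, hjlt⟩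
      · by_cases hvx : PySem.Set.contains (SC main_lib_id version_id graph roots n).2.1 x = true
        · rw [f1 x] at hvx
          have hxa : (x == main_lib_id) = false := by
            simpa using hFa x hx
          rw [hxa] at hvx
          exact Or.inr (by simpa using hvx)
        · have hvxf : PySem.Set.contains (SC main_lib_id version_id graph roots n).2.1 x = false := by
            cases hb : PySem.Set.contains (SC main_lib_id version_id graph roots n).2.1 x
            · rfl
            · exact absurd hb hvx
          have := chain_rec main_lib_id version_id graph roots hroots n x hmem hvxf
          exact Or.inl (chain_pers_le main_lib_id version_id graph roots hroots (n + 1) (K - 1)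
            hn1K x _ this)
      · have hjn : j ≤ (n : Int) := by omega
        have := chain_down_le main_lib_id version_id graph roots n (K - 1) hnK x j hj hjn
        refine Or.inr ?_
        rw [PySem.Dict.contains_eq_isSome_get?, this]
        rfl
    have hP4 : ∀ m j, ((SC main_lib_id version_id graph roots n).2.2).get? m = some j →
        ((SC main_lib_id version_id graph roots (K - 1)).2.2).get? m = some j ∧
          j ≤ ((n : Int) + 1) := by
      intro m j hm
      have h2 := f2 m j hm
      exact ⟨chain_pers_le main_lib_id version_id graph roots hroots n (K - 1) hnK m j hm, by omega⟩
    obtain ⟨w, hsplit, hDel', hP1', hc5⟩ := expandL_level main_lib_id version_id graph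
      ((SC main_lib_id version_id graph roots (K - 1)).2.2) ((n : Int) + 1) hDel
      (SC main_lib_id version_id graph roots n).2.1
      (SC main_lib_id version_id graph roots n).2.2 [] exp hP1 f1 hHF hP4
    rw [List.nil_append] at hsplit
    have hstep : SC main_lib_id version_id graph roots (n + 1) =
        ((procLevel main_lib_id version_id graph (SC main_lib_id version_id graph roots n).1
          ((n : Int) + 1) (SC main_lib_id version_id graph roots n).2.1
          (SC main_lib_id version_id graph roots n).2.2 []).2.2,
         (procLevel main_lib_id version_id graph (SC main_lib_id version_id graph roots n).1
          ((n : Int) + 1) (SC main_lib_id version_id graph roots n).2.1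
          (SC main_lib_id version_id graph roots n).2.2 []).1,
         (procLevel main_lib_id version_id graph (SC main_lib_id version_id graph roots n).1
          ((n : Int) + 1) (SC main_lib_id version_id graph roots n).2.1
          (SC main_lib_id version_id graph roots n).2.2 []).2.1) := rfl
    -- unfold one level of levelsRun
    show (levelsRun main_lib_id version_id graph K
      ((SC main_lib_id version_id graph roots (K - 1)).2.2) rem (((n : Int) + 1) + 1)
      (expandL main_lib_id version_id graph
        ((SC main_lib_id version_id graph roots (K - 1)).2.2) ((n : Int) + 1) F exp).1
      ((SC main_lib_id version_id graph roots (K - 1)).2.2,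
       (expandL main_lib_id version_id graph
        ((SC main_lib_id version_id graph roots (K - 1)).2.2) ((n : Int) + 1) F exp).2)).1 = _
    have hcast2 : ((n : Int) + 1) + 1 = (((n + 1 : Nat)) : Int) + 1 := by push_cast; ring
    rw [hcast2]
    apply ih (n + 1) (by omega)
    · -- Del at the next level
      have hfr : (SC main_lib_id version_id graph roots (n + 1)).1 = w := by
        rw [hstep]
        exact hsplit
      rw [hfr]
      have : (((n + 1 : Nat) : Int) + 1) = ((n : Int) + 1) + 1 := by push_cast; ring
      rw [this]
      exact hDel'
    · intro m
      rw [hstep]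
      exact hP1' m
    · intro x' hx'
      exact (hc5 x' hx').1

-- one deepening round of B computes the next chain acc
lemma iter_one (main_lib_id version_id : Int) (graph : List (Int × List (Int × List Int)))
    (roots : List Int) (hroots : ∀ x ∈ roots, x ≠ main_lib_id) (K : Nat) (hK : 1 ≤ K) :
    (roots.foldl (fun s r => dfsB main_lib_id version_id graph K (K - 1) r 1 s)
      ((SC main_lib_id version_id graph roots (K - 1)).2.2, PySem.Set.empty)).1 =
      (SC main_lib_id version_id graph roots K).2.2 := by
  have hval : ∀ x j, ((SC main_lib_id version_id graph roots (K - 1)).2.2).get? x = some j →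
      1 ≤ j := by
    intro x j h
    exact ((chainCF main_lib_id version_id graph roots hroots (K - 1)).2.1 x j h).1
  have hd := dfs_levels main_lib_id version_id graph K
    ((SC main_lib_id version_id graph roots (K - 1)).2.2) hval (K - 1) 1 roots
    ((SC main_lib_id version_id graph roots (K - 1)).2.2) PySem.Set.empty
    (extD_refl _ _) (by push_cast [Nat.cast_sub hK]; ring) le_rfl
  show (dfsList main_lib_id version_id graph K (K - 1) 1 roots
    ((SC main_lib_id version_id graph roots (K - 1)).2.2, PySem.Set.empty)).1 = _
  rw [hd.1]
  have h1 : (1 : Int) = ((0 : Nat) : Int) + 1 := by norm_num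
  rw [h1]
  apply levels_to_chain main_lib_id version_id graph roots hroots K hK (K - 1) 0 (by omega)
  · exact Del_refl _ _
  · intro m
    show PySem.Set.contains PySem.Set.empty m = (PySem.Dict.empty : PySem.Dict Int Int).contains m
    rw [PySem.Dict.contains_empty]
    simp [PySem.Set.contains, PySem.Set.empty]
  · exact hroots

-- ---- loopB fuel handling and the outer loop ----
lemma loopB_nil (main_lib_id version_id : Int) (graph : List (Int × List (Int × List Int)))
    (f : Nat) (d : Int) (v : PySem.Set Int) (acc : PySem.Dict Int Int) :
    loopB main_lib_id version_id graph f [] d v acc = acc := by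
  cases f <;> rfl

lemma loopB_fuel (main_lib_id version_id : Int) (graph : List (Int × List (Int × List Int))) :
    ∀ (f g : Nat) (fr : List Int) (d : Int) (v : PySem.Set Int) (acc : PySem.Dict Int Int),
    phiB graph fr v ≤ f → phiB graph fr v ≤ g →
    loopB main_lib_id version_id graph f fr d v acc =
      loopB main_lib_id version_id graph g fr d v acc := by
  intro f
  induction f with
  | zero =>
    intro g fr d v acc hf hg
    cases fr with
    | nil => rw [loopB_nil, loopB_nil]
    | cons x t => simp [phiB] at hf
  | succ m ih =>
    intro g fr d v acc hf hg
    cases fr with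
    | nil => rw [loopB_nil, loopB_nil]
    | cons x t =>
      cases g with
      | zero => simp [phiB] at hg
      | succ m' =>
        simp only [loopB]
        have hspec := procLevel_spec main_lib_id version_id graph (x :: t) d v acc []
        by_cases hnx : (procLevel main_lib_id version_id graph (x :: t) d v acc []).2.2 = []
        · have h1 := hspec.1
          rw [hnx]
          rw [loopB_nil, loopB_nil]
        · have hlt := hspec.2 hnx
          apply ih
          · simp only [phiB] at hf ⊢
            rw [if_neg hnx]
            simp at hf
            omega
          · simp only [phiB] at hg ⊢
            rw [if_neg hnx]
            simp at hg
            omega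

-- acc sizes along the chain are bounded by roots + total dependency lists
lemma chain_size_le (main_lib_id version_id : Int) (graph : List (Int × List (Int × List Int)))
    (roots : List Int) (hroots : ∀ x ∈ roots, x ≠ main_lib_id) (n : Nat) :
    ((SC main_lib_id version_id graph roots n).2.2).size ≤
      roots.length + pvTotalDeps version_id graph := by
  obtain ⟨_, _, _, f7, f8, _⟩ := chainCF main_lib_id version_id graph roots hroots n
  have hsub : ∀ m ∈ ((SC main_lib_id version_id graph roots n).2.2).keys,
      m ∈ roots ++ pvAllDeps version_id graph := by
    intro m hm
    have : ((SC main_lib_id version_id graph roots n).2.2).contains m = true :=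
      (PySem.Dict.contains_iff_mem_keys _ _).mpr hm
    rcases f8 m this with h' | h'
    · exact List.mem_append.mpr (Or.inl h')
    · exact List.mem_append.mpr (Or.inr h')
  have hcard : ((SC main_lib_id version_id graph roots n).2.2).keys.length =
      ((SC main_lib_id version_id graph roots n).2.2).keys.toFinset.card := by
    rw [List.toFinset_card_of_nodup f7]
  have hsub2 : ((SC main_lib_id version_id graph roots n).2.2).keys.toFinset ⊆
      (roots ++ pvAllDeps version_id graph).toFinset := by
    intro m hm
    rw [List.mem_toFinset] at *
    exact hsub m hm
  have hle : ((SC main_lib_id version_id graph roots n).2.2).keys.toFinset.card ≤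
      (roots ++ pvAllDeps version_id graph).toFinset.card := Finset.card_le_card hsub2
  have hle2 : (roots ++ pvAllDeps version_id graph).toFinset.card ≤
      (roots ++ pvAllDeps version_id graph).length := List.toFinset_card_le _
  have hkeys : ((SC main_lib_id version_id graph roots n).2.2).size =
      ((SC main_lib_id version_id graph roots n).2.2).keys.length := by
    simp [PySem.Dict.size, PySem.Dict.keys]
  rw [hkeys, hcard]
  calc ((SC main_lib_id version_id graph roots n).2.2).keys.toFinset.card
      ≤ (roots ++ pvAllDeps version_id graph).length := le_trans hle hle2
    _ = roots.length + pvTotalDeps version_id graph := by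
        rw [List.length_append, pvTotalDeps_eq]

-- helper: a fixpoint level stops the levelsync loop
lemma loopB_fix (main_lib_id version_id : Int) (graph : List (Int × List (Int × List Int)))
    (f : Nat) (fr : List Int) (d : Int) (v : PySem.Set Int) (acc : PySem.Dict Int Int)
    (h : procLevel main_lib_id version_id graph fr d v acc [] = (v, acc, [])) :
    loopB main_lib_id version_id graph f fr d v acc = acc := by
  cases fr with
  | nil => exact loopB_nil main_lib_id version_id graph f d v acc
  | cons x t =>
    cases f with
    | zero => rfl
    | succ m =>
      simp only [loopB, h]
      exact loopB_nil main_lib_id version_id graph m (d + 1) v acc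

-- the outer deepening loop equals the levelsync loop
lemma iter_loop (main_lib_id version_id : Int) (graph : List (Int × List (Int × List Int)))
    (roots : List Int) (hroots : ∀ x ∈ roots, x ≠ main_lib_id) :
    ∀ (f K : Nat), 1 ≤ K →
    1 + roots.length + pvTotalDeps version_id graph ≤
      ((SC main_lib_id version_id graph roots (K - 1)).2.2).size + f →
    iterB main_lib_id version_id graph roots f K
      ((SC main_lib_id version_id graph roots (K - 1)).2.2) =
    loopB main_lib_id version_id graph
      (phiB graph (SC main_lib_id version_id graph roots (K - 1)).1
        (SC main_lib_id version_id graph roots (K - 1)).2.1)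
      (SC main_lib_id version_id graph roots (K - 1)).1 (K : Int)
      (SC main_lib_id version_id graph roots (K - 1)).2.1
      (SC main_lib_id version_id graph roots (K - 1)).2.2 := by
  intro f
  induction f with
  | zero =>
    intro K hK hsz
    exfalso
    have := chain_size_le main_lib_id version_id graph roots hroots (K - 1)
    omega
  | succ f ih =>
    intro K hK hsz
    have hone := iter_one main_lib_id version_id graph roots hroots K hK
    have hcast : ((K - 1 : Nat) : Int) + 1 = (K : Int) := by
      push_cast [Nat.cast_sub hK]
      ring
    have hstep : SC main_lib_id version_id graph roots K =
        ((procLevel main_lib_id version_id graph (SC main_lib_id version_id graph roots (K - 1)).1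
          ((K : Int)) (SC main_lib_id version_id graph roots (K - 1)).2.1
          (SC main_lib_id version_id graph roots (K - 1)).2.2 []).2.2,
         (procLevel main_lib_id version_id graph (SC main_lib_id version_id graph roots (K - 1)).1
          ((K : Int)) (SC main_lib_id version_id graph roots (K - 1)).2.1
          (SC main_lib_id version_id graph roots (K - 1)).2.2 []).1,
         (procLevel main_lib_id version_id graph (SC main_lib_id version_id graph roots (K - 1)).1
          ((K : Int)) (SC main_lib_id version_id graph roots (K - 1)).2.1
          (SC main_lib_id version_id graph roots (K - 1)).2.2 []).2.1) := by
      conv_lhs => rw [show K = (K - 1) + 1 from by omega]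
      show ((procLevel main_lib_id version_id graph _ (((K - 1 : Nat) : Int) + 1) _ _ []).2.2,
        (procLevel main_lib_id version_id graph _ (((K - 1 : Nat) : Int) + 1) _ _ []).1,
        (procLevel main_lib_id version_id graph _ (((K - 1 : Nat) : Int) + 1) _ _ []).2.1) = _
      rw [hcast]
    have haccK : (SC main_lib_id version_id graph roots K).2.2 =
        (procLevel main_lib_id version_id graph (SC main_lib_id version_id graph roots (K - 1)).1
          ((K : Int)) (SC main_lib_id version_id graph roots (K - 1)).2.1
          (SC main_lib_id version_id graph roots (K - 1)).2.2 []).2.1 := by rw [hstep]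
    have hfrK : (SC main_lib_id version_id graph roots K).1 =
        (procLevel main_lib_id version_id graph (SC main_lib_id version_id graph roots (K - 1)).1
          ((K : Int)) (SC main_lib_id version_id graph roots (K - 1)).2.1
          (SC main_lib_id version_id graph roots (K - 1)).2.2 []).2.2 := by rw [hstep]
    have hvK : (SC main_lib_id version_id graph roots K).2.1 =
        (procLevel main_lib_id version_id graph (SC main_lib_id version_id graph roots (K - 1)).1
          ((K : Int)) (SC main_lib_id version_id graph roots (K - 1)).2.1
          (SC main_lib_id version_id graph roots (K - 1)).2.2 []).1 := by rw [hstep]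
    have hsize := procLevel_size main_lib_id version_id graph
      (SC main_lib_id version_id graph roots (K - 1)).1 (K : Int)
      (SC main_lib_id version_id graph roots (K - 1)).2.1
      (SC main_lib_id version_id graph roots (K - 1)).2.2 []
      (chainCF main_lib_id version_id graph roots hroots (K - 1)).1
    simp only [iterB]
    rw [hone]
    by_cases heq : ((SC main_lib_id version_id graph roots K).2.2).size =
        ((SC main_lib_id version_id graph roots (K - 1)).2.2).size
    · have hbeq : (((SC main_lib_id version_id graph roots K).2.2).size ==
          ((SC main_lib_id version_id graph roots (K - 1)).2.2).size) = true := by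
        simpa using heq
      rw [hbeq]
      simp only [if_true]
      have hfix := hsize.2 (by rw [← haccK]; exact heq)
      have haccfix : (SC main_lib_id version_id graph roots K).2.2 =
          (SC main_lib_id version_id graph roots (K - 1)).2.2 := by
        rw [haccK, hfix]
      rw [haccfix]
      exact (loopB_fix main_lib_id version_id graph _ _ _ _ _ hfix).symm
    · have hbeq : (((SC main_lib_id version_id graph roots K).2.2).size ==
          ((SC main_lib_id version_id graph roots (K - 1)).2.2).size) = false := by
        simpa using heq
      rw [hbeq]
      simp only [Bool.false_eq_true, if_false]
      have hfr : (SC main_lib_id version_id graph roots (K - 1)).1 ≠ [] := by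
        intro hnil
        apply heq
        rw [haccK, hnil]
        rfl
      have hgrow : ((SC main_lib_id version_id graph roots (K - 1)).2.2).size + 1 ≤
          ((SC main_lib_id version_id graph roots K).2.2).size := by
        have h1 := hsize.1
        rw [← haccK] at h1
        have : ((SC main_lib_id version_id graph roots (K - 1)).2.2).size ≠
            ((SC main_lib_id version_id graph roots K).2.2).size := fun h => heq h.symm
        omega
      have hK1 : (K + 1 - 1) = K := by omega
      have hih := ih (K + 1) (by omega) (by rw [hK1]; omega)
      rw [hK1] at hih
      calc iterB main_lib_id version_id graph roots f (K + 1)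
            (SC main_lib_id version_id graph roots K).2.2
          = loopB main_lib_id version_id graph
              (phiB graph (SC main_lib_id version_id graph roots K).1
                (SC main_lib_id version_id graph roots K).2.1)
              (SC main_lib_id version_id graph roots K).1 ((K + 1 : Nat) : Int)
              (SC main_lib_id version_id graph roots K).2.1
              (SC main_lib_id version_id graph roots K).2.2 := hih
        _ = loopB main_lib_id version_id graph
              (phiB graph (SC main_lib_id version_id graph roots (K - 1)).1
                (SC main_lib_id version_id graph roots (K - 1)).2.1)
              (SC main_lib_id version_id graph roots (K - 1)).1 (K : Int)
              (SC main_lib_id version_id graph roots (K - 1)).2.1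
              (SC main_lib_id version_id graph roots (K - 1)).2.2 := by
            -- unfold one step of the RHS levelsync loop
            cases hfrc : (SC main_lib_id version_id graph roots (K - 1)).1 with
            | nil => exact absurd hfrc hfr
            | cons x t =>
              rw [hfrc] at haccK hfrK hvK
              have hspec := procLevel_spec main_lib_id version_id graph (x :: t) (K : Int)
                (SC main_lib_id version_id graph roots (K - 1)).2.1
                (SC main_lib_id version_id graph roots (K - 1)).2.2 []
              rw [← hfrK, ← hvK] at hspec
              have hphi : phiB graph (x :: t)
                  (SC main_lib_id version_id graph roots (K - 1)).2.1 =
                  2 * pvUnvisKeys graph (SC main_lib_id version_id graph roots (K - 1)).2.1 + 1 := by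
                simp [phiB]
              rw [hphi]
              simp only [loopB]
              rw [← haccK, ← hfrK, ← hvK]
              have hcast3 : (K : Int) + 1 = ((K + 1 : Nat) : Int) := by push_cast; ring
              rw [hcast3]
              symm
              refine loopB_fuel main_lib_id version_id graph _ _ _ _ _ _ ?_ (le_refl _)
              by_cases hnx2 : (SC main_lib_id version_id graph roots K).1 = []
              · simp only [phiB, hnx2, if_pos]
                have h1 := hspec.1
                simp
                omega
              · have hlt := hspec.2 hnx2
                simp only [phiB]
                rw [if_neg hnx2]
                omega

-- ===== VERDICT (by name: the statement is the Claim_ definition above) =====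
theorem find_all_transitive_dependencies_spec : Claim_equal_find_all_transitive_dependencies := by
  intro main_lib_id version_id graph _
  unfold Spec_find_all_transitive_dependencies
  unfold find_all_transitive_dependencies find_all_transitive_dependencies_alt
  by_cases h : (!(PySem.Dict.mk graph).contains main_lib_id ||
      !(PySem.Dict.mk ((PySem.Dict.mk graph).getD main_lib_id [])).contains version_id) = true
  · simp only [h, if_true]
  · simp only [h, Bool.false_eq_true, if_false]
    set roots := ((PySem.Dict.mk ((PySem.Dict.mk graph).getD main_lib_id [])).getD version_id
      []).filter (fun d => !(d == main_lib_id)) with hroots_def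
    have hroots : ∀ x ∈ roots, x ≠ main_lib_id := by
      intro x hx
      have := List.of_mem_filter hx
      simpa using this
    have hA := loops_eq main_lib_id version_id graph
      (phiB graph roots (PySem.Set.add PySem.Set.empty main_lib_id)) roots 1
      (PySem.Set.add PySem.Set.empty main_lib_id) PySem.Dict.empty (le_refl _)
    have hB := iter_loop main_lib_id version_id graph roots hroots
      (1 + roots.length + pvTotalDeps version_id graph) 1 le_rfl
      (by
        have h0 : (SC main_lib_id version_id graph roots (1 - 1)).2.2 = PySem.Dict.empty := rfl
        rw [h0, PySem.Dict.size_empty]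
        omega)
    have h0 : (SC main_lib_id version_id graph roots (1 - 1)) =
        (roots, PySem.Set.add PySem.Set.empty main_lib_id, PySem.Dict.empty) := rfl
    rw [h0] at hB
    exact congrArg PySem.Dict.items (hA.trans hB.symm)
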